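-- pv_equiv track=rewrite | github.com/ZLPolaris/Algorithm | leet-code-python/面试题 17.07. 婴儿名字/solution-one.py | trulyMostPopular
-- ===== SOURCE A (Python) =====
-- from typing import List
--
-- class UnionFind:
--     def __init__(self):
--         self.root = {}
--         self.weight = {}
--
--     def add(self, node, w):
--         if node not in self.root:
--             self.root[node] = node
--             self.weight[node] = w
--
--     def find(self, node):
--         father = self.root[node]
--         if node != father and father != self.root[father]:
--             self.root[node] = self.find(father)
--             self.weight[father] -= self.weight[node]
--         return self.root[node]
--
--     def union(self, node1, node2):
--         self.add(node1, 0)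
--         self.add(node2, 0)
--         f1 = self.find(node1)
--         f2 = self.find(node2)
--         if f1 == f2:
--             return False
--         if f1 <= f2:
--             self.root[f2] = f1
--             self.weight[f1] += self.weight[f2]
--         else:
--             self.root[f1] = f2
--             self.weight[f2] += self.weight[f1]
--         return True
--
-- def trulyMostPopular(names: List[str], synonyms: List[str]) -> List[str]:
--     uf = UnionFind()
--     for name in names:
--         left = name.find("(")
--         uf.add(name[: left], int(name[left + 1: -1]))
--     for synonym in synonyms:
--         split_index = synonym.find(",")
--         uf.union(synonym[1:split_index], synonym[split_index + 1:-1])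
--     test = set()
--     res = []
--     for data in uf.root:
--         f = uf.find(data)
--         if f not in test:
--             test.add(f)
--             res.append(f + "(" + str(uf.weight[f]) + ")")
--     return res
-- ===== SOURCE B (Python) =====
-- from typing import List
--
-- def trulyMostPopular(names: List[str], synonyms: List[str]) -> List[str]:
--     # Flat label-propagation instead of a weighted union-find: every node carries
--     # its component's representative directly; merging rewrites one label class.
--     counts = {}
--     labels = {}
--     for name in names:
--         left = name.find("(")
--         key = name[: left]
--         cnt = int(name[left + 1: -1])
--         if key not in counts:
--             counts[key] = cnt
--             labels[key] = key
--     for synonym in synonyms: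
--         comma = synonym.find(",")
--         a = synonym[1: comma]
--         b = synonym[comma + 1: -1]
--         for node in (a, b):
--             if node not in counts:
--                 counts[node] = 0
--                 labels[node] = node
--         la, lb = labels[a], labels[b]
--         if la != lb:
--             lo, hi = (la, lb) if la <= lb else (lb, la)
--             labels = {n: (lo if l == hi else l) for n, l in labels.items()}
--     seen = set()
--     res = []
--     for node, l in labels.items():
--         if l not in seen:
--             seen.add(l)
--             total = sum(c for n, c in counts.items() if labels[n] == l)
--             res.append(l + "(" + str(total) + ")")
--     return res
-- ===== Notes on version B (the rewrite author's own statement) =====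
-- stated objective: simpler
-- what changed: Replaces the weighted union-find (parent pointers, recursive find with path compression and subtree-weight bookkeeping) by flat label propagation: every node stores its component representative directly, a synonym merge rewrites one label class to the smaller representative, and the per-group totals are summed at output time, so find/compression/weights disappear entirely.
import Mathlib
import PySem

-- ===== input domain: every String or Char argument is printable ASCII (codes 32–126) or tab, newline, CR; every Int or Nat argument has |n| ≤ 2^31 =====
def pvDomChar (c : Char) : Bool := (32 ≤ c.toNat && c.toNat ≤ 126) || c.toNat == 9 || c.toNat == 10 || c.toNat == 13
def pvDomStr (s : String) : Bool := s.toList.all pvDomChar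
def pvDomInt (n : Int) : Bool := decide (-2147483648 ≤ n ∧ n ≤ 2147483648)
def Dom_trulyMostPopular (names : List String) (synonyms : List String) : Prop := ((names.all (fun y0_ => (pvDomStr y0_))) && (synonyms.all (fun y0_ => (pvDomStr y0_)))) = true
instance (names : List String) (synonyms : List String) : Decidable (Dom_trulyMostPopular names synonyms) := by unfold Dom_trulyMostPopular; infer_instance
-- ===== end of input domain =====

-- B replaces A's weighted union-find by flat label propagation (every node stores its
-- component representative; a merge rewrites one label class) — objective: simpler.

-- ===== PORT A =====
-- Python str comparison (f1 <= f2) is code-point lexicographic: ported as ≤ on .toList.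

def ufAdd (root : PySem.Dict String String) (weight : PySem.Dict String Int)
    (node : String) (w : Int) :
    PySem.Dict String String × PySem.Dict String Int :=
  if root.contains node then (root, weight)
  else (root.insert node node, weight.insert node w)

-- self.find(node): recursion on the parent chain; fuel (= dict size + 1 at call sites)
-- only makes the recursion structural, it is never exhausted on the states A builds.
def ufFind : Nat → PySem.Dict String String → PySem.Dict String Int → String →
    String × PySem.Dict String String × PySem.Dict String Int
  | 0, root, weight, node => (node, root, weight)
  | fuel + 1, root, weight, node =>
    let father := root.getD node node
    if node ≠ father ∧ father ≠ root.getD father father then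
      let res := ufFind fuel root weight father
      (res.1, (res.2.1).insert node res.1,
        (res.2.2).insert father ((res.2.2).getD father 0 - (res.2.2).getD node 0))
    else (father, root, weight)

def ufUnion (root : PySem.Dict String String) (weight : PySem.Dict String Int)
    (node1 node2 : String) :
    PySem.Dict String String × PySem.Dict String Int :=
  let s1 := ufAdd root weight node1 0
  let s2 := ufAdd s1.1 s1.2 node2 0
  let r1 := ufFind (s2.1.size + 1) s2.1 s2.2 node1
  let r2 := ufFind (r1.2.1.size + 1) r1.2.1 r1.2.2 node2
  let f1 := r1.1
  let f2 := r2.1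
  if f1 = f2 then (r2.2.1, r2.2.2)
  else if f1.toList ≤ f2.toList then
    ((r2.2.1).insert f2 f1, (r2.2.2).insert f1 ((r2.2.2).getD f1 0 + (r2.2.2).getD f2 0))
  else
    ((r2.2.1).insert f1 f2, (r2.2.2).insert f2 ((r2.2.2).getD f2 0 + (r2.2.2).getD f1 0))

def trulyMostPopular (names : List String) (synonyms : List String) : List String :=
  let st0 : PySem.Dict String String × PySem.Dict String Int :=
    names.foldl (fun st name =>
      let left := PySem.Str.find name "("
      ufAdd st.1 st.2 (PySem.Str.slice name none (some left))
        ((PySem.Int.ofStr? (PySem.Str.slice name (some (left + 1)) (some (-1)))).getD 0))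
      (PySem.Dict.mk [], PySem.Dict.mk [])
  let st1 := synonyms.foldl (fun st syn =>
      let i := PySem.Str.find syn ","
      ufUnion st.1 st.2 (PySem.Str.slice syn (some 1) (some i))
        (PySem.Str.slice syn (some (i + 1)) (some (-1)))) st0
  let fin := st1.1.keys.foldl
    (fun (acc : PySem.Set String × List String ×
        PySem.Dict String String × PySem.Dict String Int) data =>
      let r := ufFind (acc.2.2.1.size + 1) acc.2.2.1 acc.2.2.2 data
      if r.1 ∈ acc.1 then (acc.1, acc.2.1, r.2.1, r.2.2)
      else (acc.1.add r.1,
        acc.2.1 ++ [r.1 ++ "(" ++ PySem.Int.toStr ((r.2.2).getD r.1 0) ++ ")"],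
        r.2.1, r.2.2))
    (PySem.Set.ofList [], [], st1.1, st1.2)
  fin.2.1

-- ===== PORT B =====
-- {n: (lo if l == hi else l) for n, l in labels.items()} — keys are distinct, so the
-- comprehension is exactly the items list mapped in place.
def relabel (labels : PySem.Dict String String) (hi lo : String) :
    PySem.Dict String String :=
  PySem.Dict.mk (labels.items.map (fun p => (p.1, if p.2 = hi then lo else p.2)))

def bAddNode (cl : PySem.Dict String Int × PySem.Dict String String) (node : String) :
    PySem.Dict String Int × PySem.Dict String String :=
  if cl.1.contains node then cl else (cl.1.insert node 0, cl.2.insert node node)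

def trulyMostPopular_alt (names : List String) (synonyms : List String) : List String :=
  let cl0 : PySem.Dict String Int × PySem.Dict String String :=
    names.foldl (fun cl name =>
      let left := PySem.Str.find name "("
      let key := PySem.Str.slice name none (some left)
      let cnt := (PySem.Int.ofStr? (PySem.Str.slice name (some (left + 1)) (some (-1)))).getD 0
      if cl.1.contains key then cl else (cl.1.insert key cnt, cl.2.insert key key))
      (PySem.Dict.mk [], PySem.Dict.mk [])
  let cl1 := synonyms.foldl (fun cl syn =>
      let i := PySem.Str.find syn ","
      let a := PySem.Str.slice syn (some 1) (some i)
      let b := PySem.Str.slice syn (some (i + 1)) (some (-1))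
      let cl := bAddNode (bAddNode cl a) b
      let la := cl.2.getD a a
      let lb := cl.2.getD b b
      if la = lb then cl
      else if la.toList ≤ lb.toList then (cl.1, relabel cl.2 lb la)
      else (cl.1, relabel cl.2 la lb)) cl0
  (cl1.2.items.foldl (fun (acc : PySem.Set String × List String) p =>
      if p.2 ∈ acc.1 then acc
      else (acc.1.add p.2,
        acc.2 ++ [p.2 ++ "(" ++ PySem.Int.toStr
          (((cl1.1.items.filter (fun q => cl1.2.getD q.1 q.1 = p.2)).map
            (fun q => q.2)).sum) ++ ")"]))
    (PySem.Set.ofList [], [])).2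

-- ===== PRECONDITION & SPEC =====
-- Pre_ excludes exactly the inputs on which A raises: some name whose count substring
-- int(name[left+1:-1]) is not a valid int literal (ValueError).
def Pre_trulyMostPopular (names : List String) (synonyms : List String) : Prop :=
  ∀ name ∈ names,
    (PySem.Int.ofStr? (PySem.Str.slice name
      (some (PySem.Str.find name "(" + 1)) (some (-1)))).isSome
instance (names : List String) (synonyms : List String) :
    Decidable (Pre_trulyMostPopular names synonyms) := by
  unfold Pre_trulyMostPopular; infer_instance

def pvWitness_trulyMostPopular : List String × List String :=
  (["John(15)", "Jon(12)", "Chris(13)"], ["(John,Jon)", "(Chris,Kris)"])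

def Spec_trulyMostPopular (names : List String) (synonyms : List String) (out : List String) : Prop := out = trulyMostPopular_alt names synonyms
instance (names : List String) (synonyms : List String) (out : List String) : Decidable (Spec_trulyMostPopular names synonyms out) := by unfold Spec_trulyMostPopular; infer_instance

-- ===== CLAIM (what is proved, stated in full; the proofs are below) =====
def Claim_equal_trulyMostPopular : Prop := ∀ (names : List String) (synonyms : List String), Dom_trulyMostPopular names synonyms → Pre_trulyMostPopular names synonyms → Spec_trulyMostPopular names synonyms (trulyMostPopular names synonyms)

-- ===== LEMMAS AND PROOFS =====

-- Throughout: p is the parent map of A's root dict (identity off the key list K),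
-- "dec" says p is nonincreasing in Python's string order (= lexicographic on toList),
-- "fin" says p maps into K (or is the identity).  ReachU p k x: x lies on k's parent chain.

def pf (R : PySem.Dict String String) : String → String := fun k => R.getD k k

def ReachU (p : String → String) (k x : String) : Prop := ∃ n : Nat, p^[n] k = x

def reachb (p : String → String) (N : Nat) (k x : String) : Bool :=
  (List.range (N + 1)).any (fun n => p^[n] k == x)

def csum (C : PySem.Dict String Int) (K : List String) (q : String → Bool) : Int :=
  ((K.filter q).map (fun k => C.getD k 0)).sum

def rstar (R : PySem.Dict String String) (k : String) : String :=
  (pf R)^[R.keys.length] k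

-- ---- generic chain lemmas ----

theorem pv_iter_le {p : String → String} (hd : ∀ k, (p k).toList ≤ k.toList)
    (n : Nat) (k : String) : (p^[n] k).toList ≤ k.toList := by
  induction n with
  | zero => simp
  | succ n ih =>
    calc (p^[n+1] k).toList = (p (p^[n] k)).toList := by
          rw [Function.iterate_succ_apply' p n k]
      _ ≤ (p^[n] k).toList := hd _
      _ ≤ k.toList := ih

theorem pv_fix_after {p : String → String} {k : String} {m : Nat}
    (h : p (p^[m] k) = p^[m] k) {n : Nat} (hmn : m ≤ n) : p^[n] k = p^[m] k := by
  obtain ⟨d, rfl⟩ := Nat.exists_eq_add_of_le hmn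
  rw [Nat.add_comm, Function.iterate_add_apply]
  exact Function.iterate_fixed h d

theorem pv_exists_fix {p : String → String} {K : List String}
    (hd : ∀ k, (p k).toList ≤ k.toList)
    (hf : ∀ k, p k = k ∨ p k ∈ K) (hK : K.Nodup) (k : String) :
    ∃ n ≤ K.length, p (p^[n] k) = p^[n] k := by
  by_contra hno
  push_neg at hno
  -- the iterates 1..K.length+1 are pairwise distinct members of K
  have hstep : ∀ i ≤ K.length, (p^[i+1] k).toList < (p^[i] k).toList := by
    intro i hi
    have hne : p (p^[i] k) ≠ p^[i] k := hno i hi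
    have hle := hd (p^[i] k)
    rw [Function.iterate_succ_apply' p i k]
    rcases lt_or_eq_of_le hle with h | h
    · exact h
    · exact absurd (String.toList_inj.mp h) hne
  have hmono : ∀ i j, i < j → j ≤ K.length + 1 → (p^[j] k).toList < (p^[i] k).toList := by
    intro i j hij hj
    induction j with
    | zero => omega
    | succ j ih =>
      have hstepj : (p^[j+1] k).toList < (p^[j] k).toList := hstep j (by omega)
      rcases Nat.lt_or_ge i j with h | h
      · exact lt_trans hstepj (ih h (by omega))
      · have : i = j := by omega
        subst this; exact hstepj
  have hmem : ∀ i ≤ K.length, p^[i+1] k ∈ K := by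
    intro i hi
    rcases hf (p^[i] k) with h | h
    · exact absurd h (hno i hi)
    · rw [Function.iterate_succ_apply' p i k]; exact h
  set l : List String := (List.range (K.length + 1)).map (fun i => p^[i+1] k) with hl
  have hnd : l.Nodup := by
    rw [hl, List.nodup_iff_getElem?_ne_getElem?]
    intro i j hij hjlen
    simp only [List.length_map, List.length_range] at hjlen
    simp only [List.getElem?_map, List.getElem?_range, hij.trans hjlen, hjlen,
      Option.map_some, if_pos]
    simp only [List.getElem?_eq_getElem, List.length_range, hij.trans hjlen, hjlen,
      List.getElem_range, Option.map_some, ne_eq, Option.some.injEq]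
    intro hcontr
    have := hmono (i+1) (j+1) (by omega) (by omega)
    rw [hcontr] at this
    exact lt_irrefl _ this
  have hsub : l ⊆ K := by
    intro x hx
    rw [hl] at hx
    simp only [List.mem_map, List.mem_range] at hx
    obtain ⟨i, hi, rfl⟩ := hx
    exact hmem i (by omega)
  have := (List.subperm_of_subset hnd hsub).length_le
  simp [hl] at this


theorem pv_stab {p : String → String} {K : List String}
    (hd : ∀ k, (p k).toList ≤ k.toList)
    (hf : ∀ k, p k = k ∨ p k ∈ K) (hK : K.Nodup) (k : String) :
    p (p^[K.length] k) = p^[K.length] k := by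
  obtain ⟨n, hn, hfix⟩ := pv_exists_fix hd hf hK k
  rw [pv_fix_after hfix hn]
  exact hfix

theorem pv_rstar_ge {p : String → String} {K : List String}
    (hd : ∀ k, (p k).toList ≤ k.toList)
    (hf : ∀ k, p k = k ∨ p k ∈ K) (hK : K.Nodup) {M : Nat}
    (hM : K.length ≤ M) (k : String) : p^[M] k = p^[K.length] k :=
  pv_fix_after (pv_stab hd hf hK k) hM

theorem pv_reach_le {p : String → String}
    (hd : ∀ k, (p k).toList ≤ k.toList) {k x : String}
    (h : ReachU p k x) : x.toList ≤ k.toList := by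
  obtain ⟨n, rfl⟩ := h; exact pv_iter_le hd n k

theorem pv_reach_mem {p : String → String} {K : List String}
    (hf : ∀ k, p k = k ∨ p k ∈ K) {k x : String}
    (h : ReachU p k x) : x = k ∨ x ∈ K := by
  obtain ⟨n, rfl⟩ := h
  induction n with
  | zero => left; rfl
  | succ n ih =>
    rw [Function.iterate_succ_apply' p n k]
    rcases hf (p^[n] k) with h | h
    · rw [h]; exact ih
    · right; exact h

theorem pv_reach_refl (p : String → String) (k : String) : ReachU p k k := ⟨0, rfl⟩

theorem pv_reach_trans {p : String → String} {k x y : String}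
    (h1 : ReachU p k x) (h2 : ReachU p x y) : ReachU p k y := by
  obtain ⟨n, rfl⟩ := h1; obtain ⟨m, rfl⟩ := h2
  exact ⟨m + n, (Function.iterate_add_apply p m n k)⟩

theorem pv_reach_step {p : String → String} {k x : String}
    (h : ReachU p (p k) x) : ReachU p k x := by
  obtain ⟨n, rfl⟩ := h
  exact ⟨n + 1, by rw [Function.iterate_succ_apply]⟩

theorem pv_reach_destruct {p : String → String} {k x : String}
    (h : ReachU p k x) : x = k ∨ ReachU p (p k) x := by
  obtain ⟨n, rfl⟩ := h
  cases n with
  | zero => left; rfl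
  | succ n => right; exact ⟨n, by rw [← Function.iterate_succ_apply]⟩

theorem pv_root_reach {p : String → String} {x : String}
    (hroot : p x = x) (y : String) : ReachU p x y ↔ y = x := by
  constructor
  · rintro ⟨n, rfl⟩; exact Function.iterate_fixed hroot n
  · rintro rfl; exact pv_reach_refl p _

theorem pv_reach_root_eq {p : String → String} {K : List String}
    (hd : ∀ k, (p k).toList ≤ k.toList)
    (hf : ∀ k, p k = k ∨ p k ∈ K) (hK : K.Nodup) {k x : String}
    (h : ReachU p k x) (hx : p x = x) : x = p^[K.length] k := by
  obtain ⟨n, rfl⟩ := h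
  rcases Nat.le_total n K.length with hn | hn
  · exact (pv_fix_after hx hn).symm
  · exact pv_fix_after (pv_stab hd hf hK k) hn

theorem pv_reachb_iff {p : String → String} {N : Nat} {k : String}
    (hstabk : p (p^[N] k) = p^[N] k) (x : String) :
    reachb p N k x = true ↔ ReachU p k x := by
  unfold reachb
  rw [List.any_eq_true]
  constructor
  · rintro ⟨n, _, hn⟩
    exact ⟨n, by simpa using hn⟩
  · rintro ⟨n, rfl⟩
    rcases Nat.le_total n N with hn | hn
    · exact ⟨n, List.mem_range.mpr (by omega), by simp⟩
    · exact ⟨N, List.mem_range.mpr (by omega), by simp [pv_fix_after hstabk hn]⟩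


-- ---- sum lemmas (specific filter-sum shapes of the two programs) ----

theorem pv_csum_congr {C : PySem.Dict String Int} {K : List String} {q q' : String → Bool}
    (h : ∀ k ∈ K, q k = q' k) : csum C K q = csum C K q' := by
  unfold csum
  rw [List.filter_congr h]

theorem pv_csum_sub {C : PySem.Dict String Int} {K : List String} {q1 q2 : String → Bool}
    (h : ∀ k, q2 k = true → q1 k = true) :
    csum C K (fun k => q1 k && !q2 k) = csum C K q1 - csum C K q2 := by
  induction K with
  | nil => simp [csum]
  | cons a K ih =>
    unfold csum at *
    by_cases h2 : q2 a = true
    · simp [List.filter_cons, h2, h a h2, ih]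
      try omega
    · simp only [Bool.not_eq_true] at h2
      by_cases h1 : q1 a = true
      · simp [List.filter_cons, h1, h2, ih]
        try omega
      · simp only [Bool.not_eq_true] at h1
        simp [List.filter_cons, h1, h2, ih]

theorem pv_csum_or {C : PySem.Dict String Int} {K : List String} {q1 q2 : String → Bool}
    (h : ∀ k, ¬(q1 k = true ∧ q2 k = true)) :
    csum C K (fun k => q1 k || q2 k) = csum C K q1 + csum C K q2 := by
  induction K with
  | nil => simp [csum]
  | cons a K ih =>
    unfold csum at *
    by_cases h1 : q1 a = true
    · have h2 : ¬ q2 a = true := fun hh => h a ⟨h1, hh⟩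
      simp only [Bool.not_eq_true] at h2
      simp [List.filter_cons, h1, h2, ih]
      try omega
    · simp only [Bool.not_eq_true] at h1
      by_cases h2 : q2 a = true
      · simp [List.filter_cons, h1, h2, ih]
        try omega
      · simp only [Bool.not_eq_true] at h2
        simp [List.filter_cons, h1, h2, ih]

theorem pv_csum_append {C : PySem.Dict String Int} {K1 K2 : List String} {q : String → Bool} :
    csum C (K1 ++ K2) q = csum C K1 q + csum C K2 q := by
  unfold csum
  simp

theorem pv_csum_congrC {C C' : PySem.Dict String Int} {K : List String} {q : String → Bool}
    (h : ∀ k ∈ K, C.getD k 0 = C'.getD k 0) : csum C K q = csum C' K q := by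
  unfold csum
  induction K with
  | nil => simp
  | cons a K ih =>
    simp only [List.filter_cons]
    by_cases hq : q a = true
    · simp only [hq, if_pos, List.map_cons, List.sum_cons,
        h a (List.mem_cons_self), ih (fun k hk => h k (List.mem_cons_of_mem a hk))]
    · simp only [Bool.not_eq_true] at hq
      simp only [hq]
      exact ih (fun k hk => h k (List.mem_cons_of_mem a hk))

-- ---- pf / Dict lemmas ----

theorem pv_pf_insert (R : PySem.Dict String String) (a v : String) :
    pf (R.insert a v) = Function.update (pf R) a v := by
  funext j
  unfold pf
  rw [PySem.Dict.getD_insert, Function.update_apply]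

theorem pv_pf_not_mem {R : PySem.Dict String String} {k : String}
    (h : k ∉ R.keys) : pf R k = k := by
  unfold pf
  exact PySem.Dict.getD_of_not_contains _ _ (by
    rw [PySem.Dict.contains_eq_decide_mem_keys]; simp [h])

theorem pv_size_eq_keys_length (R : PySem.Dict String String) :
    R.size = R.keys.length := by
  simp [PySem.Dict.size, PySem.Dict.keys]

-- ---- the two pointer-rewiring lemmas ----
-- U1: path-compression step: node (parent father, father non-root, p father = r,
-- r a root) is repointed directly at r; chains change only in that father drops
-- everything that went through node.

theorem pv_u1_roots {p : String → String} {node father r : String}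
    (hd : ∀ k, (p k).toList ≤ k.toList)
    (hpn : p node = father) (hnf : node ≠ father) (hpf : p father = r)
    (j : String) : (Function.update p node r) j = j ↔ p j = j := by
  have hfn : father.toList < node.toList := by
    have h0 := hd node
    rw [hpn] at h0
    rcases lt_or_eq_of_le h0 with h | h
    · exact h
    · exact absurd (String.toList_inj.mp h).symm hnf
  have hrn : r ≠ node := by
    intro hcontr
    have h1 : r.toList ≤ father.toList := by rw [← hpf]; exact hd father
    rw [hcontr] at h1
    exact absurd (le_antisymm (le_of_lt hfn) h1) (by
      intro hh; exact hnf (String.toList_inj.mp hh).symm)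
  by_cases hj : j = node
  · subst hj
    constructor
    · intro h
      rw [Function.update_self] at h
      exact absurd h hrn
    · intro h
      rw [hpn] at h
      exact absurd h.symm hnf
  · rw [Function.update_of_ne hj]

theorem pv_u1_reach_ne {p : String → String} {node father r : String}
    (hpn : p node = father) (hnf : node ≠ father) (hpf : p father = r) (hpr : p r = r)
    (hrn : r ≠ node)
    {x : String} (hx : x ≠ father) (k : String) :
    ReachU (Function.update p node r) k x ↔ ReachU p k x := by
  constructor
  · rintro ⟨n, hn⟩
    induction n generalizing k with
    | zero => exact hn ▸ pv_reach_refl p k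
    | succ n ih =>
      rw [Function.iterate_succ_apply] at hn
      by_cases hk : k = node
      · subst hk
        rw [Function.update_self] at hn
        have hxr : x = r := by
          rw [Function.iterate_fixed (by rw [Function.update_of_ne hrn]; exact hpr) n] at hn
          exact hn.symm
        subst hxr
        exact ⟨2, by simp [Function.iterate_succ_apply, hpn, hpf]⟩
      · rw [Function.update_of_ne hk] at hn
        exact pv_reach_step (ih (p k) hn)
  · rintro ⟨n, hn⟩
    induction n generalizing k with
    | zero => exact hn ▸ pv_reach_refl _ k
    | succ n ih =>
      rw [Function.iterate_succ_apply] at hn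
      by_cases hk : k = node
      · subst hk
        rw [hpn] at hn
        rcases pv_reach_destruct ⟨n, hn⟩ with h | h
        · exact absurd h hx
        · rw [hpf] at h
          have hxr : x = r := (pv_root_reach hpr x).mp h
          subst hxr
          exact ⟨1, by simp [Function.update_self]⟩
      · have := ih (p k) hn
        apply pv_reach_step
        rwa [Function.update_of_ne hk]

theorem pv_u1_reach_father {p : String → String} {node father r : String}
    (hd : ∀ k, (p k).toList ≤ k.toList)
    (hpn : p node = father) (hnf : node ≠ father) (hpf : p father = r) (hpr : p r = r)
    (hfr : father ≠ r) (hrn : r ≠ node) (k : String) :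
    ReachU (Function.update p node r) k father ↔
      (ReachU p k father ∧ ¬ ReachU p k node) := by
  have hfn : father.toList < node.toList := by
    have h0 := hd node
    rw [hpn] at h0
    rcases lt_or_eq_of_le h0 with h | h
    · exact h
    · exact absurd (String.toList_inj.mp h).symm hnf
  constructor
  · rintro ⟨n, hn⟩
    induction n generalizing k with
    | zero =>
      subst hn
      refine ⟨pv_reach_refl p _, fun hcontr => ?_⟩
      exact absurd (pv_reach_le hd hcontr) (not_le.mpr hfn)
    | succ n ih =>
      rw [Function.iterate_succ_apply] at hn
      by_cases hk : k = node
      · subst hk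
        rw [Function.update_self] at hn
        rw [Function.iterate_fixed (by rw [Function.update_of_ne hrn]; exact hpr) n] at hn
        exact absurd hn.symm hfr
      · rw [Function.update_of_ne hk] at hn
        obtain ⟨h1, h2⟩ := ih (p k) hn
        refine ⟨pv_reach_step h1, fun hcontr => ?_⟩
        rcases pv_reach_destruct hcontr with h | h
        · exact hk h.symm
        · exact h2 h
  · rintro ⟨⟨n, hn⟩, hnot⟩
    induction n generalizing k with
    | zero => exact hn ▸ pv_reach_refl _ k
    | succ n ih =>
      rw [Function.iterate_succ_apply] at hn
      by_cases hk : k = node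
      · exact absurd (hk ▸ pv_reach_refl p k) hnot
      · have hnot' : ¬ ReachU p (p k) node := fun h => hnot (pv_reach_step h)
        have := ih (p k) hnot' hn
        apply pv_reach_step
        rwa [Function.update_of_ne hk]

theorem pv_u1_rstar {p : String → String} {K : List String} {node father r : String}
    (hd : ∀ k, (p k).toList ≤ k.toList)
    (hf : ∀ k, p k = k ∨ p k ∈ K) (hK : K.Nodup)
    (hpn : p node = father) (hnf : node ≠ father) (hpf : p father = r) (hpr : p r = r)
    (hfr : father ≠ r) (hrK : r ∈ K) (j : String) :
    (Function.update p node r)^[K.length] j = p^[K.length] j := by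
  have hfn : father.toList < node.toList := by
    have h0 := hd node
    rw [hpn] at h0
    rcases lt_or_eq_of_le h0 with h | h
    · exact h
    · exact absurd (String.toList_inj.mp h).symm hnf
  have hrf : r.toList ≤ father.toList := by rw [← hpf]; exact hd father
  have hrn : r ≠ node := by
    intro hcontr
    rw [hcontr] at hrf
    exact absurd (lt_of_le_of_lt hrf hfn) (lt_irrefl _)
  have hd' : ∀ k, ((Function.update p node r) k).toList ≤ k.toList := by
    intro k
    by_cases hk : k = node
    · subst hk; rw [Function.update_self]; exact le_of_lt (lt_of_le_of_lt hrf hfn)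
    · rw [Function.update_of_ne hk]; exact hd k
  have hf' : ∀ k, (Function.update p node r) k = k ∨ (Function.update p node r) k ∈ K := by
    intro k
    by_cases hk : k = node
    · subst hk; rw [Function.update_self]; exact Or.inr hrK
    · rw [Function.update_of_ne hk]; exact hf k
  set x := (Function.update p node r)^[K.length] j with hxdef
  have hxroot : (Function.update p node r) x = x := pv_stab hd' hf' hK j
  have hxrootp : p x = x := (pv_u1_roots hd hpn hnf hpf x).mp hxroot
  have hxreach : ReachU (Function.update p node r) j x := ⟨K.length, rfl⟩
  have hxne : x ≠ father := by
    intro hcontr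
    rw [hcontr] at hxrootp
    exact hfr (by rw [← hpf, hxrootp])
  have := (pv_u1_reach_ne hpn hnf hpf hpr hrn hxne j).mp hxreach
  exact pv_reach_root_eq hd hf hK this hxrootp

-- U2: union step: root hi is repointed at root lo; chains that ended at hi continue to lo.

theorem pv_u2_roots {p : String → String} {hi lo : String}
    (hhi : p hi = hi) (hne : lo ≠ hi) (j : String) :
    (Function.update p hi lo) j = j ↔ (p j = j ∧ j ≠ hi) := by
  by_cases hj : j = hi
  · subst hj
    rw [Function.update_self]
    simp [hne, hhi]
  · rw [Function.update_of_ne hj]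
    simp [hj]

theorem pv_u2_reach_ne {p : String → String} {hi lo : String}
    (hhi : p hi = hi) (hlo : p lo = lo) (hne : lo ≠ hi)
    {x : String} (hx : x ≠ lo) (k : String) :
    ReachU (Function.update p hi lo) k x ↔ ReachU p k x := by
  constructor
  · rintro ⟨n, hn⟩
    induction n generalizing k with
    | zero => exact hn ▸ pv_reach_refl p k
    | succ n ih =>
      rw [Function.iterate_succ_apply] at hn
      by_cases hk : k = hi
      · subst hk
        rw [Function.update_self] at hn
        rw [Function.iterate_fixed (by rw [Function.update_of_ne hne]; exact hlo) n] at hn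
        exact absurd hn.symm hx
      · rw [Function.update_of_ne hk] at hn
        exact pv_reach_step (ih (p k) hn)
  · rintro ⟨n, hn⟩
    induction n generalizing k with
    | zero => exact hn ▸ pv_reach_refl _ k
    | succ n ih =>
      rw [Function.iterate_succ_apply] at hn
      by_cases hk : k = hi
      · subst hk
        rw [hhi] at hn
        rw [Function.iterate_fixed hhi n] at hn
        exact hn ▸ pv_reach_refl _ _
      · have := ih (p k) hn
        apply pv_reach_step
        rwa [Function.update_of_ne hk]

theorem pv_u2_reach_hi {p : String → String} {hi lo : String}
    (hhi : p hi = hi) (hne : lo ≠ hi) (k : String)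
    (h : ReachU p k hi) : ReachU (Function.update p hi lo) k hi := by
  obtain ⟨n, hn⟩ := h
  induction n generalizing k with
  | zero => exact hn ▸ pv_reach_refl _ k
  | succ n ih =>
    rw [Function.iterate_succ_apply] at hn
    by_cases hk : k = hi
    · subst hk; exact pv_reach_refl _ _
    · apply pv_reach_step
      rw [Function.update_of_ne hk]
      exact ih (p k) hn

theorem pv_u2_reach_lo {p : String → String} {hi lo : String}
    (hhi : p hi = hi) (hlo : p lo = lo) (hne : lo ≠ hi) (k : String) :
    ReachU (Function.update p hi lo) k lo ↔ (ReachU p k lo ∨ ReachU p k hi) := by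
  constructor
  · rintro ⟨n, hn⟩
    induction n generalizing k with
    | zero => exact hn ▸ Or.inl (pv_reach_refl p k)
    | succ n ih =>
      rw [Function.iterate_succ_apply] at hn
      by_cases hk : k = hi
      · exact Or.inr (by subst hk; exact pv_reach_refl p _)
      · rw [Function.update_of_ne hk] at hn
        rcases ih (p k) hn with h | h
        · exact Or.inl (pv_reach_step h)
        · exact Or.inr (pv_reach_step h)
  · rintro (h | h)
    · obtain ⟨n, hn⟩ := h
      induction n generalizing k with
      | zero => exact hn ▸ pv_reach_refl _ k
      | succ n ih =>
        rw [Function.iterate_succ_apply] at hn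
        by_cases hk : k = hi
        · subst hk
          rw [hhi, Function.iterate_fixed hhi n] at hn
          exact absurd hn.symm hne
        · apply pv_reach_step
          rw [Function.update_of_ne hk]
          exact ih (p k) hn
    · exact pv_reach_trans (pv_u2_reach_hi hhi hne k h)
        ⟨1, by simp [Function.update_self]⟩

theorem pv_u2_rstar {p : String → String} {K : List String} {hi lo : String}
    (hd : ∀ k, (p k).toList ≤ k.toList)
    (hf : ∀ k, p k = k ∨ p k ∈ K) (hK : K.Nodup)
    (hhi : p hi = hi) (hlo : p lo = lo) (hne : lo ≠ hi)
    (hlelo : lo.toList ≤ hi.toList) (hloK : lo ∈ K) (j : String) :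
    (Function.update p hi lo)^[K.length] j =
      (if p^[K.length] j = hi then lo else p^[K.length] j) := by
  have hd' : ∀ k, ((Function.update p hi lo) k).toList ≤ k.toList := by
    intro k
    by_cases hk : k = hi
    · subst hk; rw [Function.update_self]; exact hlelo
    · rw [Function.update_of_ne hk]; exact hd k
  have hf' : ∀ k, (Function.update p hi lo) k = k ∨ (Function.update p hi lo) k ∈ K := by
    intro k
    by_cases hk : k = hi
    · subst hk; rw [Function.update_self]; exact Or.inr hloK
    · rw [Function.update_of_ne hk]; exact hf k
  have hxroot : (Function.update p hi lo) ((Function.update p hi lo)^[K.length] j) =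
      (Function.update p hi lo)^[K.length] j := pv_stab hd' hf' hK j
  obtain ⟨hxrootp, hxhi⟩ := (pv_u2_roots hhi hne _).mp hxroot
  have hxreach : ReachU (Function.update p hi lo) j
      ((Function.update p hi lo)^[K.length] j) := ⟨K.length, rfl⟩
  by_cases hxlo : (Function.update p hi lo)^[K.length] j = lo
  · rw [hxlo] at hxreach ⊢
    rcases (pv_u2_reach_lo hhi hlo hne j).mp hxreach with h | h
    · have h2 := pv_reach_root_eq hd hf hK h hlo
      rw [← h2]
      simp [hne]
    · have h2 := pv_reach_root_eq hd hf hK h hhi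
      rw [← h2]
      simp
  · have hre := (pv_u2_reach_ne hhi hlo hne hxlo j).mp hxreach
    have h2 := pv_reach_root_eq hd hf hK hre hxrootp
    rw [← h2]
    simp [hxhi]


-- ---- the A-side invariant and the find lemma ----

structure InvA (R : PySem.Dict String String) (W : PySem.Dict String Int)
    (C : PySem.Dict String Int) : Prop where
  keysW : W.keys = R.keys
  nodup : R.keys.Nodup
  hdec : ∀ k, (pf R k).toList ≤ k.toList
  hfin : ∀ k, pf R k = k ∨ pf R k ∈ R.keys
  hwgt : ∀ x ∈ R.keys,
    W.getD x 0 = csum C R.keys (fun k => reachb (pf R) R.keys.length k x)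

theorem pv_mem_of_pf_ne {R : PySem.Dict String String} {k : String}
    (h : pf R k ≠ k) : k ∈ R.keys := by
  by_contra hmem
  exact h (pv_pf_not_mem hmem)

theorem ufFind_zero (R : PySem.Dict String String) (W : PySem.Dict String Int)
    (node : String) : ufFind 0 R W node = (node, R, W) := rfl

theorem ufFind_succ_pos {R : PySem.Dict String String} {W : PySem.Dict String Int}
    {node : String} (fuel : Nat)
    (h : node ≠ R.getD node node ∧
      R.getD node node ≠ R.getD (R.getD node node) (R.getD node node)) :
    ufFind (fuel + 1) R W node =
      ((ufFind fuel R W (R.getD node node)).1,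
        ((ufFind fuel R W (R.getD node node)).2.1).insert node
          (ufFind fuel R W (R.getD node node)).1,
        ((ufFind fuel R W (R.getD node node)).2.2).insert (R.getD node node)
          (((ufFind fuel R W (R.getD node node)).2.2).getD (R.getD node node) 0 -
            ((ufFind fuel R W (R.getD node node)).2.2).getD node 0)) := by
  show (if node ≠ R.getD node node ∧
      R.getD node node ≠ R.getD (R.getD node node) (R.getD node node) then _ else _) = _
  rw [if_pos h]

theorem ufFind_succ_neg {R : PySem.Dict String String} {W : PySem.Dict String Int}
    {node : String} (fuel : Nat)
    (h : ¬ (node ≠ R.getD node node ∧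
      R.getD node node ≠ R.getD (R.getD node node) (R.getD node node))) :
    ufFind (fuel + 1) R W node = (R.getD node node, R, W) := by
  show (if node ≠ R.getD node node ∧
      R.getD node node ≠ R.getD (R.getD node node) (R.getD node node) then _ else _) = _
  rw [if_neg h]

theorem pv_find_spec (C : PySem.Dict String Int) :
    ∀ (fuel : Nat) (R : PySem.Dict String String) (W : PySem.Dict String Int)
      (node : String),
    InvA R W C →
    pf R ((pf R)^[fuel] node) = (pf R)^[fuel] node →
    (ufFind fuel R W node).1 = (pf R)^[fuel] node ∧
    (ufFind fuel R W node).2.1.keys = R.keys ∧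
    (ufFind fuel R W node).2.2.keys = W.keys ∧
    InvA (ufFind fuel R W node).2.1 (ufFind fuel R W node).2.2 C ∧
    (∀ j, (pf (ufFind fuel R W node).2.1)^[R.keys.length] j =
      (pf R)^[R.keys.length] j) ∧
    (∀ j, pf (ufFind fuel R W node).2.1 j = j ↔ pf R j = j) ∧
    pf (ufFind fuel R W node).2.1 node = (ufFind fuel R W node).1 ∧
    (∀ j, ¬ ReachU (pf R) node j → pf (ufFind fuel R W node).2.1 j = pf R j) := by
  intro fuel
  induction fuel with
  | zero =>
    intro R W node hInv hstab
    rw [Function.iterate_zero_apply] at hstab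
    rw [ufFind_zero]
    refine ⟨by simp, rfl, rfl, hInv, fun j => rfl, fun j => Iff.rfl, hstab, fun j _ => rfl⟩
  | succ fuel ih =>
    intro R W node hInv hstab
    by_cases hc : node ≠ R.getD node node ∧
        R.getD node node ≠ R.getD (R.getD node node) (R.getD node node)
    · -- compression branch
      have hpfnode : pf R node = R.getD node node := rfl
      set father := R.getD node node with hfather
      have hcn : node ≠ father := hc.1
      have hcf : pf R father ≠ father := fun h => hc.2 h.symm
      have hshift : (pf R)^[fuel + 1] node = (pf R)^[fuel] father := by
        rw [Function.iterate_succ_apply, hpfnode]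
      have hstab' : pf R ((pf R)^[fuel] father) = (pf R)^[fuel] father := by
        rw [← hshift]; exact hstab
      obtain ⟨ih1, ih2, ih3, ihInv, ih5, ih6, ih7, ih8⟩ := ih R W father hInv hstab'
      rw [ufFind_succ_pos fuel hc]
      set r := (ufFind fuel R W father).1 with hr
      set R1 := (ufFind fuel R W father).2.1 with hR1
      set W1 := (ufFind fuel R W father).2.2 with hW1
      have hfn : father.toList < node.toList := by
        have h0 := hInv.hdec node
        rw [hpfnode] at h0
        rcases lt_or_eq_of_le h0 with h | h
        · exact h
        · exact absurd (String.toList_inj.mp h).symm hcn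
      have hnodeK : node ∈ R.keys := by
        apply pv_mem_of_pf_ne
        rw [hpfnode]
        intro h
        exact hcn h.symm
      have hfatherK : father ∈ R.keys := by
        rcases hInv.hfin node with h | h
        · rw [hpfnode] at h
          exact absurd h.symm hcn
        · rw [hpfnode] at h
          exact h
      have hreachfr : ReachU (pf R) father r := by
        rw [ih1]; exact ⟨fuel, rfl⟩
      have hrroot : pf R r = r := by rw [ih1]; exact hstab'
      have hrfather : r ≠ father := by
        intro h
        rw [h] at hrroot
        exact hcf hrroot
      have hrK : r ∈ R.keys := by
        rcases pv_reach_mem hInv.hfin hreachfr with h | h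
        · exact absurd h hrfather
        · exact h
      have hrle : r.toList ≤ father.toList := pv_reach_le hInv.hdec hreachfr
      have hrn : r ≠ node := by
        intro h
        rw [h] at hrle
        exact absurd (lt_of_le_of_lt hrle hfn) (lt_irrefl _)
      have hp1node : pf R1 node = father := by
        rw [ih8 node (fun h => absurd (pv_reach_le hInv.hdec h) (not_le.mpr hfn))]
        exact hpfnode
      have hp1father : pf R1 father = r := ih7
      have hp1r : pf R1 r = r := (ih6 r).mpr hrroot
      have hp1fr : father ≠ r := fun h => hrfather h.symm
      have hd1 : ∀ k, (pf R1 k).toList ≤ k.toList := ihInv.hdec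
      have hf1 : ∀ k, pf R1 k = k ∨ pf R1 k ∈ R.keys := by
        intro k
        rcases ihInv.hfin k with h | h
        · exact Or.inl h
        · rw [ih2] at h; exact Or.inr h
      have hkeys2 : (R1.insert node r).keys = R.keys := by
        rw [PySem.Dict.keys_insert_of_contains _ _
          ((PySem.Dict.contains_iff_mem_keys _ _).mpr (by rw [ih2]; exact hnodeK))]
        exact ih2
      have hkeysW2 : (W1.insert father (W1.getD father 0 - W1.getD node 0)).keys
          = W.keys := by
        rw [PySem.Dict.keys_insert_of_contains _ _
          ((PySem.Dict.contains_iff_mem_keys _ _).mpr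
            (by rw [ih3, hInv.keysW]; exact hfatherK))]
        exact ih3
      have hp2 : pf (R1.insert node r) = Function.update (pf R1) node r :=
        pv_pf_insert R1 node r
      have hd2 : ∀ k, (pf (R1.insert node r) k).toList ≤ k.toList := by
        intro k
        rw [hp2]
        by_cases hk : k = node
        · subst hk
          rw [Function.update_self]
          exact le_of_lt (lt_of_le_of_lt hrle hfn)
        · rw [Function.update_of_ne hk]; exact hd1 k
      have hf2 : ∀ k, pf (R1.insert node r) k = k ∨ pf (R1.insert node r) k ∈ R.keys := by
        intro k
        rw [hp2]
        by_cases hk : k = node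
        · subst hk; rw [Function.update_self]; exact Or.inr hrK
        · rw [Function.update_of_ne hk]; exact hf1 k
      have hroots2 : ∀ j, pf (R1.insert node r) j = j ↔ pf R j = j := by
        intro j
        rw [hp2, pv_u1_roots hd1 hp1node hcn hp1father j]
        exact ih6 j
      have hrstar2 : ∀ j, (pf (R1.insert node r))^[R.keys.length] j =
          (pf R)^[R.keys.length] j := by
        intro j
        rw [hp2, pv_u1_rstar hd1 hf1 hInv.nodup hp1node hcn hp1father hp1r hp1fr hrK j]
        exact ih5 j
      have hstab1 : ∀ k, pf R1 ((pf R1)^[R.keys.length] k)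
          = (pf R1)^[R.keys.length] k :=
        fun k => pv_stab hd1 hf1 hInv.nodup k
      have hstab2 : ∀ k, pf (R1.insert node r)
            ((pf (R1.insert node r))^[R.keys.length] k)
          = (pf (R1.insert node r))^[R.keys.length] k :=
        fun k => pv_stab hd2 hf2 hInv.nodup k
      have hsub : ∀ k, reachb (pf R1) R.keys.length k node = true →
          reachb (pf R1) R.keys.length k father = true := by
        intro k hk
        rw [pv_reachb_iff (hstab1 k)] at hk ⊢
        exact pv_reach_trans hk ⟨1, by simp [hp1node]⟩
      have hwgt2 : ∀ x ∈ R.keys,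
          (W1.insert father (W1.getD father 0 - W1.getD node 0)).getD x 0 =
          csum C R.keys (fun k => reachb (pf (R1.insert node r)) R.keys.length k x) := by
        intro x hx
        have hw1 : ∀ y ∈ R.keys, W1.getD y 0
            = csum C R.keys (fun k => reachb (pf R1) R.keys.length k y) := by
          intro y hy
          have := ihInv.hwgt y (by rw [ih2]; exact hy)
          rwa [ih2] at this
        by_cases hxf : x = father
        · subst hxf
          rw [PySem.Dict.getD_insert_self, hw1 father hfatherK, hw1 node hnodeK]
          have hcongr : ∀ k ∈ R.keys,
              reachb (pf (R1.insert node r)) R.keys.length k father =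
              (reachb (pf R1) R.keys.length k father &&
                ! reachb (pf R1) R.keys.length k node) := by
            intro k _
            apply Bool.eq_iff_iff.mpr
            rw [Bool.and_eq_true, Bool.not_eq_true']
            rw [pv_reachb_iff (hstab2 k), hp2,
              pv_u1_reach_father hd1 hp1node hcn hp1father hp1r hp1fr hrn k,
              pv_reachb_iff (hstab1 k)]
            constructor
            · rintro ⟨ha, hb⟩
              refine ⟨ha, ?_⟩
              rw [Bool.eq_false_iff, ne_eq, pv_reachb_iff (hstab1 k)]
              exact hb
            · rintro ⟨ha, hb⟩
              refine ⟨ha, ?_⟩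
              rw [Bool.eq_false_iff, ne_eq, pv_reachb_iff (hstab1 k)] at hb
              exact hb
          rw [pv_csum_congr hcongr, pv_csum_sub hsub]
        · rw [PySem.Dict.getD_insert, if_neg hxf, hw1 x hx]
          have hcongr2 : ∀ k ∈ R.keys,
              reachb (pf R1) R.keys.length k x =
              reachb (pf (R1.insert node r)) R.keys.length k x := by
            intro k _
            apply Bool.eq_iff_iff.mpr
            rw [pv_reachb_iff (hstab2 k), hp2,
              pv_u1_reach_ne hp1node hcn hp1father hp1r hrn hxf k,
              pv_reachb_iff (hstab1 k)]
          rw [pv_csum_congr hcongr2]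
      refine ⟨?_, hkeys2, hkeysW2, ?_, hrstar2, hroots2, ?_, ?_⟩
      · rw [hshift]
        exact ih1
      · refine ⟨?_, ?_, hd2, ?_, ?_⟩
        · rw [hkeysW2, hInv.keysW, hkeys2]
        · rw [hkeys2]; exact hInv.nodup
        · intro k
          rw [hkeys2]
          exact hf2 k
        · intro x hx
          rw [hkeys2] at hx ⊢
          exact hwgt2 x hx
      · rw [hp2]
        exact Function.update_self node r (pf R1)
      · intro j hj
        have hjn : j ≠ node := by
          intro h
          exact hj (by rw [h]; exact pv_reach_refl _ _)
        rw [hp2, Function.update_of_ne hjn]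
        apply ih8 j
        intro hr2
        apply hj
        apply pv_reach_step
        rw [hpfnode]
        exact hr2
    · -- no-compression branch
      rw [ufFind_succ_neg fuel hc]
      push_neg at hc
      have hpfnode : pf R node = R.getD node node := rfl
      have hval : R.getD node node = (pf R)^[fuel + 1] node := by
        by_cases hn : node = R.getD node node
        · rw [Function.iterate_fixed (by rw [hpfnode, ← hn]) (fuel + 1)]
          exact hn.symm
        · have hroot : pf R (R.getD node node) = R.getD node node := (hc hn).symm
          rw [Function.iterate_succ_apply, hpfnode]
          rw [Function.iterate_fixed hroot fuel]
      exact ⟨hval, rfl, rfl, hInv, fun j => rfl, fun j => Iff.rfl, hpfnode, fun j _ => rfl⟩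


-- ---- small helpers ----

theorem pv_csum_false {C : PySem.Dict String Int} {K : List String} {q : String → Bool}
    (h : ∀ k ∈ K, q k = false) : csum C K q = 0 := by
  unfold csum
  rw [List.filter_eq_nil_iff.mpr (by intro a ha; rw [h a ha]; simp)]
  simp

theorem pv_getD_mem_irrel {L : PySem.Dict String String} {k : String}
    (h : k ∈ L.keys) (d1 d2 : String) : L.getD k d1 = L.getD k d2 := by
  rw [PySem.Dict.getD_eq_get?_getD, PySem.Dict.getD_eq_get?_getD]
  cases hv : L.get? k with
  | none => exact absurd ((PySem.Dict.get?_eq_none_iff_not_mem_keys L k).mp hv) (by simp [h])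
  | some v => rfl

theorem pv_foldl_pair {α γ δ : Type} (f : γ → α → γ) (g : δ → α → δ)
    (P : γ → δ → Prop) :
    ∀ (l : List α), (∀ c d x, x ∈ l → P c d → P (f c x) (g d x)) →
    ∀ (c0 : γ) (d0 : δ), P c0 d0 → P (l.foldl f c0) (l.foldl g d0) := by
  intro l
  induction l with
  | nil => intro _ c0 d0 h; exact h
  | cons x l ih =>
    intro hstep c0 d0 h
    exact ih (fun c d y hy => hstep c d y (List.mem_cons_of_mem x hy))
      (f c0 x) (g d0 x) (hstep c0 d0 x List.mem_cons_self h)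

-- ---- relabel lemmas ----

theorem pv_relabel_keys (L : PySem.Dict String String) (hi lo : String) :
    (relabel L hi lo).keys = L.keys := by
  unfold relabel
  cases L with
  | mk items =>
    rw [PySem.Dict.keys_mk]
    simp [PySem.Dict.keys, List.map_map]

theorem pv_relabel_get? (L : PySem.Dict String String) (hi lo : String) (j : String) :
    (relabel L hi lo).get? j = (L.get? j).map (fun l => if l = hi then lo else l) := by
  unfold relabel
  cases L with
  | mk items =>
    induction items with
    | nil => rfl
    | cons p rest ih =>
      obtain ⟨k, v⟩ := p
      rw [List.map_cons, PySem.Dict.get?_mk_cons, PySem.Dict.get?_mk_cons]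
      by_cases hk : k == j
      · rw [if_pos hk, if_pos hk]
        rfl
      · rw [if_neg hk, if_neg hk]
        exact ih

theorem pv_relabel_getD_mem {L : PySem.Dict String String} {j : String}
    (h : j ∈ L.keys) (hi lo : String) :
    (relabel L hi lo).getD j j = if L.getD j j = hi then lo else L.getD j j := by
  rw [PySem.Dict.getD_eq_get?_getD, PySem.Dict.getD_eq_get?_getD, pv_relabel_get?]
  cases hv : L.get? j with
  | none => exact absurd ((PySem.Dict.get?_eq_none_iff_not_mem_keys L j).mp hv) (by simp [h])
  | some v => rfl

theorem pv_relabel_getD_not_mem {L : PySem.Dict String String} {j : String}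
    (h : j ∉ L.keys) (hi lo : String) : (relabel L hi lo).getD j j = j := by
  rw [PySem.Dict.getD_eq_get?_getD, pv_relabel_get?]
  rw [(PySem.Dict.get?_eq_none_iff_not_mem_keys L j).mpr h]
  rfl

-- ---- the joint invariant ----

structure InvAB (R : PySem.Dict String String) (W : PySem.Dict String Int)
    (C : PySem.Dict String Int) (L : PySem.Dict String String) : Prop where
  a : InvA R W C
  keysL : L.keys = R.keys
  keysC : C.keys = R.keys
  lab : ∀ k, L.getD k k = (pf R)^[R.keys.length] k

theorem pv_inv_empty : InvAB (PySem.Dict.mk []) (PySem.Dict.mk [])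
    (PySem.Dict.mk []) (PySem.Dict.mk []) := by
  refine ⟨⟨rfl, by simp [PySem.Dict.keys], ?_, ?_, ?_⟩, rfl, rfl, ?_⟩
  · intro k
    rw [pv_pf_not_mem (by simp [PySem.Dict.keys])]
  · intro k
    exact Or.inl (pv_pf_not_mem (by simp [PySem.Dict.keys]))
  · intro x hx
    simp [PySem.Dict.keys] at hx
  · intro k
    simp only [PySem.Dict.keys, PySem.Dict.items]
    rw [List.map_nil, List.length_nil, Function.iterate_zero_apply]
    rw [PySem.Dict.getD_eq_get?_getD]
    rfl

-- add step: A's uf.add(key, cnt) against B's conditional insert (counts + self label)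
theorem pv_inv_add {R : PySem.Dict String String} {W C : PySem.Dict String Int}
    {L : PySem.Dict String String} (h : InvAB R W C L) (key : String) (cnt : Int) :
    InvAB (ufAdd R W key cnt).1 (ufAdd R W key cnt).2
      (if C.contains key = true then C else C.insert key cnt)
      (if C.contains key = true then L else L.insert key key) ∧
    R.contains key = C.contains key ∧
    key ∈ (ufAdd R W key cnt).1.keys ∧
    (∀ x ∈ R.keys, x ∈ (ufAdd R W key cnt).1.keys) := by
  have hcc : R.contains key = C.contains key := by
    rw [PySem.Dict.contains_eq_decide_mem_keys, PySem.Dict.contains_eq_decide_mem_keys,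
      h.keysC]
  by_cases hcont : R.contains key = true
  · have hcontC : C.contains key = true := by rw [← hcc]; exact hcont
    have hkeyK : key ∈ R.keys := (PySem.Dict.contains_iff_mem_keys R key).mp hcont
    unfold ufAdd
    rw [if_pos hcont, if_pos hcontC, if_pos hcontC]
    exact ⟨h, hcc, hkeyK, fun x hx => hx⟩
  · have hcontC : ¬ C.contains key = true := by rw [← hcc]; exact hcont
    have hkeyK : key ∉ R.keys := by
      intro hk
      exact hcont ((PySem.Dict.contains_iff_mem_keys R key).mpr hk)
    have hcontF : R.contains key = false := by simp at hcont ⊢; exact hcont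
    have hcontCF : C.contains key = false := by rw [← hcc]; exact hcontF
    have hcontLF : L.contains key = false := by
      rw [PySem.Dict.contains_eq_decide_mem_keys, h.keysL]
      simp [hkeyK]
    have hcontWF : W.contains key = false := by
      rw [PySem.Dict.contains_eq_decide_mem_keys, h.a.keysW]
      simp [hkeyK]
    unfold ufAdd
    rw [if_neg hcont, if_neg hcontC, if_neg hcontC]
    have hpfkey : pf R key = key := pv_pf_not_mem hkeyK
    have hpeq : pf (R.insert key key) = pf R := by
      rw [pv_pf_insert]
      calc Function.update (pf R) key key
          = Function.update (pf R) key (pf R key) := by rw [hpfkey]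
        _ = pf R := Function.update_eq_self key (pf R)
    have hkeysR : (R.insert key key).keys = R.keys ++ [key] :=
      PySem.Dict.keys_insert_of_not_contains _ _ hcontF
    have hkeysW : (W.insert key cnt).keys = W.keys ++ [key] :=
      PySem.Dict.keys_insert_of_not_contains _ _ hcontWF
    have hkeysC2 : (C.insert key cnt).keys = C.keys ++ [key] :=
      PySem.Dict.keys_insert_of_not_contains _ _ hcontCF
    have hkeysL2 : (L.insert key key).keys = L.keys ++ [key] :=
      PySem.Dict.keys_insert_of_not_contains _ _ hcontLF
    have hlen : (R.insert key key).keys.length = R.keys.length + 1 := by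
      rw [hkeysR]; simp
    have hnodup2 : (R.insert key key).keys.Nodup :=
      PySem.Dict.nodup_keys_insert _ _ _ h.a.nodup
    have hstabN : ∀ k, pf R ((pf R)^[R.keys.length] k) = (pf R)^[R.keys.length] k :=
      fun k => pv_stab h.a.hdec h.a.hfin h.a.nodup k
    have hiterN1 : ∀ k, (pf R)^[R.keys.length + 1] k = (pf R)^[R.keys.length] k :=
      fun k => pv_rstar_ge h.a.hdec h.a.hfin h.a.nodup (by omega) k
    have hfin2 : ∀ k, pf (R.insert key key) k = k ∨
        pf (R.insert key key) k ∈ (R.insert key key).keys := by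
      intro k
      rw [hpeq, hkeysR]
      rcases h.a.hfin k with hk | hk
      · exact Or.inl hk
      · exact Or.inr (List.mem_append_left _ hk)
    refine ⟨⟨⟨?_, hnodup2, ?_, hfin2, ?_⟩, ?_, ?_, ?_⟩, hcc, ?_, ?_⟩
    · rw [hkeysW, hkeysR, h.a.keysW]
    · intro k
      rw [hpeq]
      exact h.a.hdec k
    · -- weights
      intro x hx
      rw [hkeysR] at hx
      rw [hpeq, hlen, hkeysR]
      have hstabN1 : ∀ k, pf R ((pf R)^[R.keys.length + 1] k)
          = (pf R)^[R.keys.length + 1] k := by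
        intro k
        rw [hiterN1 k]
        exact hstabN k
      rcases List.mem_append.mp hx with hx | hx
      · -- old key
        have hxk : x ≠ key := fun hxx => hkeyK (hxx ▸ hx)
        rw [PySem.Dict.getD_insert_of_ne _ _ _ hxk, h.a.hwgt x hx]
        rw [pv_csum_append]
        have hlast : csum (C.insert key cnt) [key]
            (fun k => reachb (pf R) (R.keys.length + 1) k x) = 0 := by
          apply pv_csum_false
          intro k hk
          rw [List.mem_singleton] at hk
          subst hk
          rw [← Bool.not_eq_true]
          rw [pv_reachb_iff (hstabN1 k)]
          rw [pv_root_reach hpfkey x]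
          exact hxk
        rw [hlast, add_zero]
        have hcsC : csum (C.insert key cnt) R.keys
            (fun k => reachb (pf R) (R.keys.length + 1) k x)
            = csum C R.keys (fun k => reachb (pf R) (R.keys.length + 1) k x) := by
          apply pv_csum_congrC
          intro k hk
          exact PySem.Dict.getD_insert_of_ne _ _ _ (fun hxx => hkeyK (hxx ▸ hk))
        rw [hcsC]
        apply pv_csum_congr
        intro k _
        apply Bool.eq_iff_iff.mpr
        rw [pv_reachb_iff (hstabN k), pv_reachb_iff (hstabN1 k)]
      · -- the new key
        rw [List.mem_singleton] at hx
        subst hx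
        rw [PySem.Dict.getD_insert_self]
        rw [pv_csum_append]
        have hold : csum (C.insert x cnt) R.keys
            (fun k => reachb (pf R) (R.keys.length + 1) k x) = 0 := by
          apply pv_csum_false
          intro k hk
          rw [← Bool.not_eq_true]
          rw [pv_reachb_iff (hstabN1 k)]
          intro hre
          rcases pv_reach_mem h.a.hfin hre with hh | hh
          · exact hkeyK (hh ▸ hk)
          · exact hkeyK hh
        rw [hold, zero_add]
        unfold csum
        have hbx : reachb (pf R) (R.keys.length + 1) x x = true := by
          rw [pv_reachb_iff (hstabN1 x)]
          exact pv_reach_refl _ x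
        rw [List.filter_singleton, hbx]
        simp [PySem.Dict.getD_insert_self]
    · rw [hkeysL2, hkeysR, h.keysL]
    · rw [hkeysC2, hkeysR, h.keysC]
    · -- labels
      intro k
      rw [hpeq, hlen, hiterN1 k]
      by_cases hk : k = key
      · subst hk
        rw [PySem.Dict.getD_insert_self]
        exact (Function.iterate_fixed hpfkey _).symm
      · rw [PySem.Dict.getD_insert_of_ne _ _ _ hk]
        exact h.lab k
    · rw [hkeysR]
      exact List.mem_append_right _ (List.mem_singleton.mpr rfl)
    · intro x hx
      rw [hkeysR]
      exact List.mem_append_left _ hx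


-- find with the fuel the ports use (dict size + 1) preserves the joint invariant
-- and returns exactly the stored label (= the chain root).
theorem pv_find_inv {R : PySem.Dict String String} {W C : PySem.Dict String Int}
    {L : PySem.Dict String String} (h : InvAB R W C L) (node : String) :
    (ufFind (R.size + 1) R W node).1 = L.getD node node ∧
    InvAB (ufFind (R.size + 1) R W node).2.1 (ufFind (R.size + 1) R W node).2.2 C L ∧
    (ufFind (R.size + 1) R W node).2.1.keys = R.keys ∧
    (∀ j, pf (ufFind (R.size + 1) R W node).2.1 j = j ↔ pf R j = j) := by
  have hsz : R.size = R.keys.length := pv_size_eq_keys_length R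
  have hiter : (pf R)^[R.size + 1] node = (pf R)^[R.keys.length] node := by
    rw [hsz]
    exact pv_rstar_ge h.a.hdec h.a.hfin h.a.nodup (by omega) node
  have hstab : pf R ((pf R)^[R.size + 1] node) = (pf R)^[R.size + 1] node := by
    rw [hiter]
    exact pv_stab h.a.hdec h.a.hfin h.a.nodup node
  obtain ⟨h1, h2, h3, h4, h5, h6, h7, h8⟩ := pv_find_spec C (R.size + 1) R W node h.a hstab
  refine ⟨?_, ⟨h4, ?_, ?_, ?_⟩, h2, h6⟩
  · rw [h1, hiter, ← h.lab node]
  · rw [h2, ← h.keysL]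
  · rw [h2, ← h.keysC]
  · intro k
    rw [h2, h5 k]
    exact h.lab k

-- the union merge: root hi is attached beneath root lo (mirrored by one relabel pass)
theorem pv_inv_merge {R : PySem.Dict String String} {W C : PySem.Dict String Int}
    {L : PySem.Dict String String} (h : InvAB R W C L) {lo hi : String}
    (hhi : pf R hi = hi) (hlo : pf R lo = lo) (hne : lo ≠ hi)
    (hlelo : lo.toList ≤ hi.toList) (hloK : lo ∈ R.keys) (hhiK : hi ∈ R.keys) :
    InvAB (R.insert hi lo) (W.insert lo (W.getD lo 0 + W.getD hi 0)) C
      (relabel L hi lo) := by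
  have hp' : pf (R.insert hi lo) = Function.update (pf R) hi lo := pv_pf_insert R hi lo
  have hkeys : (R.insert hi lo).keys = R.keys :=
    PySem.Dict.keys_insert_of_contains _ _ ((PySem.Dict.contains_iff_mem_keys _ _).mpr hhiK)
  have hkeysW : (W.insert lo (W.getD lo 0 + W.getD hi 0)).keys = W.keys :=
    PySem.Dict.keys_insert_of_contains _ _ ((PySem.Dict.contains_iff_mem_keys _ _).mpr
      (by rw [h.a.keysW]; exact hloK))
  have hd' : ∀ k, (pf (R.insert hi lo) k).toList ≤ k.toList := by
    intro k
    rw [hp']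
    by_cases hk : k = hi
    · subst hk; rw [Function.update_self]; exact hlelo
    · rw [Function.update_of_ne hk]; exact h.a.hdec k
  have hf' : ∀ k, pf (R.insert hi lo) k = k ∨ pf (R.insert hi lo) k ∈ R.keys := by
    intro k
    rw [hp']
    by_cases hk : k = hi
    · subst hk; rw [Function.update_self]; exact Or.inr hloK
    · rw [Function.update_of_ne hk]; exact h.a.hfin k
  have hstabN : ∀ k, pf R ((pf R)^[R.keys.length] k) = (pf R)^[R.keys.length] k :=
    fun k => pv_stab h.a.hdec h.a.hfin h.a.nodup k
  have hstab' : ∀ k, pf (R.insert hi lo) ((pf (R.insert hi lo))^[R.keys.length] k)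
      = (pf (R.insert hi lo))^[R.keys.length] k :=
    fun k => pv_stab hd' hf' h.a.nodup k
  have hdisj : ∀ k, ¬ (reachb (pf R) R.keys.length k lo = true ∧
      reachb (pf R) R.keys.length k hi = true) := by
    rintro k ⟨h1, h2⟩
    rw [pv_reachb_iff (hstabN k)] at h1 h2
    exact hne ((pv_reach_root_eq h.a.hdec h.a.hfin h.a.nodup h1 hlo).trans
      (pv_reach_root_eq h.a.hdec h.a.hfin h.a.nodup h2 hhi).symm)
  refine ⟨⟨?_, ?_, hd', ?_, ?_⟩, ?_, ?_, ?_⟩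
  · rw [hkeysW, hkeys, h.a.keysW]
  · rw [hkeys]; exact h.a.nodup
  · intro k
    rw [hkeys]
    exact hf' k
  · -- weights
    intro x hx
    rw [hkeys] at hx ⊢
    by_cases hxlo : x = lo
    · rw [hxlo]
      rw [PySem.Dict.getD_insert_self, h.a.hwgt lo hloK, h.a.hwgt hi hhiK]
      have hcongr : ∀ k ∈ R.keys,
          (reachb (pf R) R.keys.length k lo || reachb (pf R) R.keys.length k hi) =
          reachb (pf (R.insert hi lo)) R.keys.length k lo := by
        intro k _
        apply Bool.eq_iff_iff.mpr
        rw [Bool.or_eq_true, pv_reachb_iff (hstab' k), hp',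
          pv_u2_reach_lo hhi hlo hne k, pv_reachb_iff (hstabN k),
          pv_reachb_iff (hstabN k)]
      rw [← pv_csum_congr hcongr, pv_csum_or hdisj]
    · rw [PySem.Dict.getD_insert_of_ne _ _ _ hxlo, h.a.hwgt x hx]
      apply pv_csum_congr
      intro k _
      apply Bool.eq_iff_iff.mpr
      rw [pv_reachb_iff (hstabN k), pv_reachb_iff (hstab' k), hp',
        pv_u2_reach_ne hhi hlo hne hxlo k]
  · rw [pv_relabel_keys, hkeys, h.keysL]
  · rw [hkeys, h.keysC]
  · -- labels
    intro k
    rw [hkeys]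
    by_cases hk : k ∈ L.keys
    · rw [pv_relabel_getD_mem hk, h.lab k, hp',
        pv_u2_rstar h.a.hdec h.a.hfin h.a.nodup hhi hlo hne hlelo hloK k]
    · have hkR : k ∉ R.keys := by rw [← h.keysL]; exact hk
      rw [pv_relabel_getD_not_mem hk, hp']
      have : Function.update (pf R) hi lo k = k := by
        rw [Function.update_of_ne (fun hcontr => hkR (by rw [hcontr]; exact hhiK)),
          pv_pf_not_mem hkR]
      exact (Function.iterate_fixed this _).symm

theorem pv_bAddNode_eq (C : PySem.Dict String Int) (L : PySem.Dict String String)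
    (node : String) :
    bAddNode (C, L) node =
      ((if C.contains node = true then C else C.insert node 0),
       (if C.contains node = true then L else L.insert node node)) := by
  unfold bAddNode
  by_cases h : C.contains node = true <;> simp [h]



theorem ufUnion_eq (R : PySem.Dict String String) (W : PySem.Dict String Int)
    (n1 n2 : String) :
    ufUnion R W n1 n2 =
      (if (ufFind ((ufAdd (ufAdd R W n1 0).1 (ufAdd R W n1 0).2 n2 0).1.size + 1) (ufAdd (ufAdd R W n1 0).1 (ufAdd R W n1 0).2 n2 0).1 (ufAdd (ufAdd R W n1 0).1 (ufAdd R W n1 0).2 n2 0).2 n1).1 = (ufFind ((ufFind ((ufAdd (ufAdd R W n1 0).1 (ufAdd R W n1 0).2 n2 0).1.size + 1) (ufAdd (ufAdd R W n1 0).1 (ufAdd R W n1 0).2 n2 0).1 (ufAdd (ufAdd R W n1 0).1 (ufAdd R W n1 0).2 n2 0).2 n1).2.1.size + 1) (ufFind ((ufAdd (ufAdd R W n1 0).1 (ufAdd R W n1 0).2 n2 0).1.size + 1) (ufAdd (ufAdd R W n1 0).1 (ufAdd R W n1 0).2 n2 0).1 (ufAdd (ufAdd R W n1 0).1 (ufAdd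 R W n1 0).2 n2 0).2 n1).2.1 (ufFind ((ufAdd (ufAdd R W n1 0).1 (ufAdd R W n1 0).2 n2 0).1.size + 1) (ufAdd (ufAdd R W n1 0).1 (ufAdd R W n1 0).2 n2 0).1 (ufAdd (ufAdd R W n1 0).1 (ufAdd R W n1 0).2 n2 0).2 n1).2.2 n2).1 then ((ufFind ((ufFind ((ufAdd (ufAdd R W n1 0).1 (ufAdd R W n1 0).2 n2 0).1.size + 1) (ufAdd (ufAdd R W n1 0).1 (ufAdd R W n1 0).2 n2 0).1 (ufAdd (ufAdd R W n1 0).1 (ufAdd R W n1 0).2 n2 0).2 n1).2.1.size + 1) (ufFind ((ufAdd (ufAdd R W n1 0).1 (ufAdd R W n1 0).2 n2 0).1.size + 1) (ufAdd (ufAdd R W n1 0).1 (ufAdd R W n1 0).2 n2 0).1 (ufAdd (ufAdd R W n1 0).1 (ufAdd R W n1 0).2 n2 0).2 n1).2.1 (ufFind ((ufAdd (ufAdd R W n1 0).1 (ufAdd R W n1 0).2 n2 0).1.size + 1) (ufAdd (ufAdd R W n1 0).1 (ufAdd R W n1 0).2 n2 0).1 (ufAdd (ufAdd R W n1 0).1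 (ufAdd R W n1 0).2 n2 0).2 n1).2.2 n2).2.1, (ufFind ((ufFind ((ufAdd (ufAdd R W n1 0).1 (ufAdd R W n1 0).2 n2 0).1.size + 1) (ufAdd (ufAdd R W n1 0).1 (ufAdd R W n1 0).2 n2 0).1 (ufAdd (ufAdd R W n1 0).1 (ufAdd R W n1 0).2 n2 0).2 n1).2.1.size + 1) (ufFind ((ufAdd (ufAdd R W n1 0).1 (ufAdd R W n1 0).2 n2 0).1.size + 1) (ufAdd (ufAdd R W n1 0).1 (ufAdd R W n1 0).2 n2 0).1 (ufAdd (ufAdd R W n1 0).1 (ufAdd R W n1 0).2 n2 0).2 n1).2.1 (ufFind ((ufAdd (ufAdd R W n1 0).1 (ufAdd R W n1 0).2 n2 0).1.size + 1) (ufAdd (ufAdd R W n1 0).1 (ufAdd R W n1 0).2 n2 0).1 (ufAdd (ufAdd R W n1 0).1 (ufAdd R W n1 0).2 n2 0).2 n1).2.2 n2).2.2)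
       else if (ufFind ((ufAdd (ufAdd R W n1 0).1 (ufAdd R W n1 0).2 n2 0).1.size + 1) (ufAdd (ufAdd R W n1 0).1 (ufAdd R W n1 0).2 n2 0).1 (ufAdd (ufAdd R W n1 0).1 (ufAdd R W n1 0).2 n2 0).2 n1).1.toList ≤ (ufFind ((ufFind ((ufAdd (ufAdd R W n1 0).1 (ufAdd R W n1 0).2 n2 0).1.size + 1) (ufAdd (ufAdd R W n1 0).1 (ufAdd R W n1 0).2 n2 0).1 (ufAdd (ufAdd R W n1 0).1 (ufAdd R W n1 0).2 n2 0).2 n1).2.1.size + 1) (ufFind ((ufAdd (ufAdd R W n1 0).1 (ufAdd R W n1 0).2 n2 0).1.size + 1) (ufAdd (ufAdd R W n1 0).1 (ufAdd R W n1 0).2 n2 0).1 (ufAdd (ufAdd R W n1 0).1 (ufAdd R W n1 0).2 n2 0).2 n1).2.1 (ufFind ((ufAdd (ufAdd R W n1 0).1 (ufAdd R W n1 0).2 n2 0).1.size + 1) (ufAdd (ufAdd R W n1 0).1 (ufAdd R W n1 0).2 n2 0).1 (ufAdd (ufAdd R W n1 0).1 (ufAdd R W n1 0).2 n2 0).2 n1).2.2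 n2).1.toList then
         ((ufFind ((ufFind ((ufAdd (ufAdd R W n1 0).1 (ufAdd R W n1 0).2 n2 0).1.size + 1) (ufAdd (ufAdd R W n1 0).1 (ufAdd R W n1 0).2 n2 0).1 (ufAdd (ufAdd R W n1 0).1 (ufAdd R W n1 0).2 n2 0).2 n1).2.1.size + 1) (ufFind ((ufAdd (ufAdd R W n1 0).1 (ufAdd R W n1 0).2 n2 0).1.size + 1) (ufAdd (ufAdd R W n1 0).1 (ufAdd R W n1 0).2 n2 0).1 (ufAdd (ufAdd R W n1 0).1 (ufAdd R W n1 0).2 n2 0).2 n1).2.1 (ufFind ((ufAdd (ufAdd R W n1 0).1 (ufAdd R W n1 0).2 n2 0).1.size + 1) (ufAdd (ufAdd R W n1 0).1 (ufAdd R W n1 0).2 n2 0).1 (ufAdd (ufAdd R W n1 0).1 (ufAdd R W n1 0).2 n2 0).2 n1).2.2 n2).2.1.insert (ufFind ((ufFind ((ufAdd (ufAdd R W n1 0).1 (ufAdd R W n1 0).2 n2 0).1.size + 1) (ufAdd (ufAdd R W n1 0).1 (ufAdd R W n1 0).2 n2 0).1 (ufAdd (ufAdd R W n1 0).1 (ufAdd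 R W n1 0).2 n2 0).2 n1).2.1.size + 1) (ufFind ((ufAdd (ufAdd R W n1 0).1 (ufAdd R W n1 0).2 n2 0).1.size + 1) (ufAdd (ufAdd R W n1 0).1 (ufAdd R W n1 0).2 n2 0).1 (ufAdd (ufAdd R W n1 0).1 (ufAdd R W n1 0).2 n2 0).2 n1).2.1 (ufFind ((ufAdd (ufAdd R W n1 0).1 (ufAdd R W n1 0).2 n2 0).1.size + 1) (ufAdd (ufAdd R W n1 0).1 (ufAdd R W n1 0).2 n2 0).1 (ufAdd (ufAdd R W n1 0).1 (ufAdd R W n1 0).2 n2 0).2 n1).2.2 n2).1 (ufFind ((ufAdd (ufAdd R W n1 0).1 (ufAdd R W n1 0).2 n2 0).1.size + 1) (ufAdd (ufAdd R W n1 0).1 (ufAdd R W n1 0).2 n2 0).1 (ufAdd (ufAdd R W n1 0).1 (ufAdd R W n1 0).2 n2 0).2 n1).1,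
          (ufFind ((ufFind ((ufAdd (ufAdd R W n1 0).1 (ufAdd R W n1 0).2 n2 0).1.size + 1) (ufAdd (ufAdd R W n1 0).1 (ufAdd R W n1 0).2 n2 0).1 (ufAdd (ufAdd R W n1 0).1 (ufAdd R W n1 0).2 n2 0).2 n1).2.1.size + 1) (ufFind ((ufAdd (ufAdd R W n1 0).1 (ufAdd R W n1 0).2 n2 0).1.size + 1) (ufAdd (ufAdd R W n1 0).1 (ufAdd R W n1 0).2 n2 0).1 (ufAdd (ufAdd R W n1 0).1 (ufAdd R W n1 0).2 n2 0).2 n1).2.1 (ufFind ((ufAdd (ufAdd R W n1 0).1 (ufAdd R W n1 0).2 n2 0).1.size + 1) (ufAdd (ufAdd R W n1 0).1 (ufAdd R W n1 0).2 n2 0).1 (ufAdd (ufAdd R W n1 0).1 (ufAdd R W n1 0).2 n2 0).2 n1).2.2 n2).2.2.insert (ufFind ((ufAdd (ufAdd R W n1 0).1 (ufAdd R W n1 0).2 n2 0).1.size + 1) (ufAdd (ufAdd R W n1 0).1 (ufAdd R W n1 0).2 n2 0).1 (ufAdd (ufAdd R W n1 0).1 (ufAdd R W n1 0).2 n2 0).2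 n1).1 ((ufFind ((ufFind ((ufAdd (ufAdd R W n1 0).1 (ufAdd R W n1 0).2 n2 0).1.size + 1) (ufAdd (ufAdd R W n1 0).1 (ufAdd R W n1 0).2 n2 0).1 (ufAdd (ufAdd R W n1 0).1 (ufAdd R W n1 0).2 n2 0).2 n1).2.1.size + 1) (ufFind ((ufAdd (ufAdd R W n1 0).1 (ufAdd R W n1 0).2 n2 0).1.size + 1) (ufAdd (ufAdd R W n1 0).1 (ufAdd R W n1 0).2 n2 0).1 (ufAdd (ufAdd R W n1 0).1 (ufAdd R W n1 0).2 n2 0).2 n1).2.1 (ufFind ((ufAdd (ufAdd R W n1 0).1 (ufAdd R W n1 0).2 n2 0).1.size + 1) (ufAdd (ufAdd R W n1 0).1 (ufAdd R W n1 0).2 n2 0).1 (ufAdd (ufAdd R W n1 0).1 (ufAdd R W n1 0).2 n2 0).2 n1).2.2 n2).2.2.getD (ufFind ((ufAdd (ufAdd R W n1 0).1 (ufAdd R W n1 0).2 n2 0).1.size + 1) (ufAdd (ufAdd R W n1 0).1 (ufAdd R W n1 0).2 n2 0).1 (ufAdd (ufAdd R W n1 0).1 (ufAdd R W n1 0).2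 n2 0).2 n1).1 0 + (ufFind ((ufFind ((ufAdd (ufAdd R W n1 0).1 (ufAdd R W n1 0).2 n2 0).1.size + 1) (ufAdd (ufAdd R W n1 0).1 (ufAdd R W n1 0).2 n2 0).1 (ufAdd (ufAdd R W n1 0).1 (ufAdd R W n1 0).2 n2 0).2 n1).2.1.size + 1) (ufFind ((ufAdd (ufAdd R W n1 0).1 (ufAdd R W n1 0).2 n2 0).1.size + 1) (ufAdd (ufAdd R W n1 0).1 (ufAdd R W n1 0).2 n2 0).1 (ufAdd (ufAdd R W n1 0).1 (ufAdd R W n1 0).2 n2 0).2 n1).2.1 (ufFind ((ufAdd (ufAdd R W n1 0).1 (ufAdd R W n1 0).2 n2 0).1.size + 1) (ufAdd (ufAdd R W n1 0).1 (ufAdd R W n1 0).2 n2 0).1 (ufAdd (ufAdd R W n1 0).1 (ufAdd R W n1 0).2 n2 0).2 n1).2.2 n2).2.2.getD (ufFind ((ufFind ((ufAdd (ufAdd R W n1 0).1 (ufAdd R W n1 0).2 n2 0).1.size + 1) (ufAdd (ufAdd R W n1 0).1 (ufAdd R W n1 0).2 n2 0).1 (ufAdd (ufAdd R W n1 0).1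 (ufAdd R W n1 0).2 n2 0).2 n1).2.1.size + 1) (ufFind ((ufAdd (ufAdd R W n1 0).1 (ufAdd R W n1 0).2 n2 0).1.size + 1) (ufAdd (ufAdd R W n1 0).1 (ufAdd R W n1 0).2 n2 0).1 (ufAdd (ufAdd R W n1 0).1 (ufAdd R W n1 0).2 n2 0).2 n1).2.1 (ufFind ((ufAdd (ufAdd R W n1 0).1 (ufAdd R W n1 0).2 n2 0).1.size + 1) (ufAdd (ufAdd R W n1 0).1 (ufAdd R W n1 0).2 n2 0).1 (ufAdd (ufAdd R W n1 0).1 (ufAdd R W n1 0).2 n2 0).2 n1).2.2 n2).1 0))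
       else
         ((ufFind ((ufFind ((ufAdd (ufAdd R W n1 0).1 (ufAdd R W n1 0).2 n2 0).1.size + 1) (ufAdd (ufAdd R W n1 0).1 (ufAdd R W n1 0).2 n2 0).1 (ufAdd (ufAdd R W n1 0).1 (ufAdd R W n1 0).2 n2 0).2 n1).2.1.size + 1) (ufFind ((ufAdd (ufAdd R W n1 0).1 (ufAdd R W n1 0).2 n2 0).1.size + 1) (ufAdd (ufAdd R W n1 0).1 (ufAdd R W n1 0).2 n2 0).1 (ufAdd (ufAdd R W n1 0).1 (ufAdd R W n1 0).2 n2 0).2 n1).2.1 (ufFind ((ufAdd (ufAdd R W n1 0).1 (ufAdd R W n1 0).2 n2 0).1.size + 1) (ufAdd (ufAdd R W n1 0).1 (ufAdd R W n1 0).2 n2 0).1 (ufAdd (ufAdd R W n1 0).1 (ufAdd R W n1 0).2 n2 0).2 n1).2.2 n2).2.1.insert (ufFind ((ufAdd (ufAdd R W n1 0).1 (ufAdd R W n1 0).2 n2 0).1.size + 1) (ufAdd (ufAdd R W n1 0).1 (ufAdd R W n1 0).2 n2 0).1 (ufAdd (ufAdd R W n1 0).1 (ufAdd R W n1 0).2 n2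 0).2 n1).1 (ufFind ((ufFind ((ufAdd (ufAdd R W n1 0).1 (ufAdd R W n1 0).2 n2 0).1.size + 1) (ufAdd (ufAdd R W n1 0).1 (ufAdd R W n1 0).2 n2 0).1 (ufAdd (ufAdd R W n1 0).1 (ufAdd R W n1 0).2 n2 0).2 n1).2.1.size + 1) (ufFind ((ufAdd (ufAdd R W n1 0).1 (ufAdd R W n1 0).2 n2 0).1.size + 1) (ufAdd (ufAdd R W n1 0).1 (ufAdd R W n1 0).2 n2 0).1 (ufAdd (ufAdd R W n1 0).1 (ufAdd R W n1 0).2 n2 0).2 n1).2.1 (ufFind ((ufAdd (ufAdd R W n1 0).1 (ufAdd R W n1 0).2 n2 0).1.size + 1) (ufAdd (ufAdd R W n1 0).1 (ufAdd R W n1 0).2 n2 0).1 (ufAdd (ufAdd R W n1 0).1 (ufAdd R W n1 0).2 n2 0).2 n1).2.2 n2).1,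
          (ufFind ((ufFind ((ufAdd (ufAdd R W n1 0).1 (ufAdd R W n1 0).2 n2 0).1.size + 1) (ufAdd (ufAdd R W n1 0).1 (ufAdd R W n1 0).2 n2 0).1 (ufAdd (ufAdd R W n1 0).1 (ufAdd R W n1 0).2 n2 0).2 n1).2.1.size + 1) (ufFind ((ufAdd (ufAdd R W n1 0).1 (ufAdd R W n1 0).2 n2 0).1.size + 1) (ufAdd (ufAdd R W n1 0).1 (ufAdd R W n1 0).2 n2 0).1 (ufAdd (ufAdd R W n1 0).1 (ufAdd R W n1 0).2 n2 0).2 n1).2.1 (ufFind ((ufAdd (ufAdd R W n1 0).1 (ufAdd R W n1 0).2 n2 0).1.size + 1) (ufAdd (ufAdd R W n1 0).1 (ufAdd R W n1 0).2 n2 0).1 (ufAdd (ufAdd R W n1 0).1 (ufAdd R W n1 0).2 n2 0).2 n1).2.2 n2).2.2.insert (ufFind ((ufFind ((ufAdd (ufAdd R W n1 0).1 (ufAdd R W n1 0).2 n2 0).1.size + 1) (ufAdd (ufAdd R W n1 0).1 (ufAdd R W n1 0).2 n2 0).1 (ufAdd (ufAdd R W n1 0).1 (ufAdd R W n1 0).2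 n2 0).2 n1).2.1.size + 1) (ufFind ((ufAdd (ufAdd R W n1 0).1 (ufAdd R W n1 0).2 n2 0).1.size + 1) (ufAdd (ufAdd R W n1 0).1 (ufAdd R W n1 0).2 n2 0).1 (ufAdd (ufAdd R W n1 0).1 (ufAdd R W n1 0).2 n2 0).2 n1).2.1 (ufFind ((ufAdd (ufAdd R W n1 0).1 (ufAdd R W n1 0).2 n2 0).1.size + 1) (ufAdd (ufAdd R W n1 0).1 (ufAdd R W n1 0).2 n2 0).1 (ufAdd (ufAdd R W n1 0).1 (ufAdd R W n1 0).2 n2 0).2 n1).2.2 n2).1 ((ufFind ((ufFind ((ufAdd (ufAdd R W n1 0).1 (ufAdd R W n1 0).2 n2 0).1.size + 1) (ufAdd (ufAdd R W n1 0).1 (ufAdd R W n1 0).2 n2 0).1 (ufAdd (ufAdd R W n1 0).1 (ufAdd R W n1 0).2 n2 0).2 n1).2.1.size + 1) (ufFind ((ufAdd (ufAdd R W n1 0).1 (ufAdd R W n1 0).2 n2 0).1.size + 1) (ufAdd (ufAdd R W n1 0).1 (ufAdd R W n1 0).2 n2 0).1 (ufAdd (ufAdd R W n1 0).1 (ufAdd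 R W n1 0).2 n2 0).2 n1).2.1 (ufFind ((ufAdd (ufAdd R W n1 0).1 (ufAdd R W n1 0).2 n2 0).1.size + 1) (ufAdd (ufAdd R W n1 0).1 (ufAdd R W n1 0).2 n2 0).1 (ufAdd (ufAdd R W n1 0).1 (ufAdd R W n1 0).2 n2 0).2 n1).2.2 n2).2.2.getD (ufFind ((ufFind ((ufAdd (ufAdd R W n1 0).1 (ufAdd R W n1 0).2 n2 0).1.size + 1) (ufAdd (ufAdd R W n1 0).1 (ufAdd R W n1 0).2 n2 0).1 (ufAdd (ufAdd R W n1 0).1 (ufAdd R W n1 0).2 n2 0).2 n1).2.1.size + 1) (ufFind ((ufAdd (ufAdd R W n1 0).1 (ufAdd R W n1 0).2 n2 0).1.size + 1) (ufAdd (ufAdd R W n1 0).1 (ufAdd R W n1 0).2 n2 0).1 (ufAdd (ufAdd R W n1 0).1 (ufAdd R W n1 0).2 n2 0).2 n1).2.1 (ufFind ((ufAdd (ufAdd R W n1 0).1 (ufAdd R W n1 0).2 n2 0).1.size + 1) (ufAdd (ufAdd R W n1 0).1 (ufAdd R W n1 0).2 n2 0).1 (ufAdd (ufAdd R W n1 0).1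 (ufAdd R W n1 0).2 n2 0).2 n1).2.2 n2).1 0 + (ufFind ((ufFind ((ufAdd (ufAdd R W n1 0).1 (ufAdd R W n1 0).2 n2 0).1.size + 1) (ufAdd (ufAdd R W n1 0).1 (ufAdd R W n1 0).2 n2 0).1 (ufAdd (ufAdd R W n1 0).1 (ufAdd R W n1 0).2 n2 0).2 n1).2.1.size + 1) (ufFind ((ufAdd (ufAdd R W n1 0).1 (ufAdd R W n1 0).2 n2 0).1.size + 1) (ufAdd (ufAdd R W n1 0).1 (ufAdd R W n1 0).2 n2 0).1 (ufAdd (ufAdd R W n1 0).1 (ufAdd R W n1 0).2 n2 0).2 n1).2.1 (ufFind ((ufAdd (ufAdd R W n1 0).1 (ufAdd R W n1 0).2 n2 0).1.size + 1) (ufAdd (ufAdd R W n1 0).1 (ufAdd R W n1 0).2 n2 0).1 (ufAdd (ufAdd R W n1 0).1 (ufAdd R W n1 0).2 n2 0).2 n1).2.2 n2).2.2.getD (ufFind ((ufAdd (ufAdd R W n1 0).1 (ufAdd R W n1 0).2 n2 0).1.size + 1) (ufAdd (ufAdd R W n1 0).1 (ufAdd R W n1 0).2 n2 0).1 (ufAdd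 (ufAdd R W n1 0).1 (ufAdd R W n1 0).2 n2 0).2 n1).1 0))) := rfl

-- one synonym step: A's uf.union(a, b) against B's adds + label lookup + relabel pass
set_option maxHeartbeats 1000000 in
theorem pv_inv_union {R : PySem.Dict String String} {W C : PySem.Dict String Int}
    {L : PySem.Dict String String} (h : InvAB R W C L) (a b : String) :
    InvAB (ufUnion R W a b).1 (ufUnion R W a b).2
      (if (bAddNode (bAddNode (C, L) a) b).2.getD a a
          = (bAddNode (bAddNode (C, L) a) b).2.getD b b then
        bAddNode (bAddNode (C, L) a) b
      else if ((bAddNode (bAddNode (C, L) a) b).2.getD a a).toList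
          ≤ ((bAddNode (bAddNode (C, L) a) b).2.getD b b).toList then
        ((bAddNode (bAddNode (C, L) a) b).1,
          relabel (bAddNode (bAddNode (C, L) a) b).2
            ((bAddNode (bAddNode (C, L) a) b).2.getD b b)
            ((bAddNode (bAddNode (C, L) a) b).2.getD a a))
      else
        ((bAddNode (bAddNode (C, L) a) b).1,
          relabel (bAddNode (bAddNode (C, L) a) b).2
            ((bAddNode (bAddNode (C, L) a) b).2.getD a a)
            ((bAddNode (bAddNode (C, L) a) b).2.getD b b))).1
      (if (bAddNode (bAddNode (C, L) a) b).2.getD a a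
          = (bAddNode (bAddNode (C, L) a) b).2.getD b b then
        bAddNode (bAddNode (C, L) a) b
      else if ((bAddNode (bAddNode (C, L) a) b).2.getD a a).toList
          ≤ ((bAddNode (bAddNode (C, L) a) b).2.getD b b).toList then
        ((bAddNode (bAddNode (C, L) a) b).1,
          relabel (bAddNode (bAddNode (C, L) a) b).2
            ((bAddNode (bAddNode (C, L) a) b).2.getD b b)
            ((bAddNode (bAddNode (C, L) a) b).2.getD a a))
      else
        ((bAddNode (bAddNode (C, L) a) b).1,
          relabel (bAddNode (bAddNode (C, L) a) b).2
            ((bAddNode (bAddNode (C, L) a) b).2.getD a a)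
            ((bAddNode (bAddNode (C, L) a) b).2.getD b b))).2 := by
  rw [ufUnion_eq]
  obtain ⟨h1, hcc1, hmem1a, hpres1⟩ := pv_inv_add h a 0
  obtain ⟨h2, hcc2, hmem2b, hpres2⟩ := pv_inv_add h1 b 0
  have hBdd : bAddNode (bAddNode (C, L) a) b =
      ((if (if C.contains a = true then C else C.insert a 0).contains b = true
          then (if C.contains a = true then C else C.insert a 0)
          else (if C.contains a = true then C else C.insert a 0).insert b 0),
       (if (if C.contains a = true then C else C.insert a 0).contains b = true
          then (if C.contains a = true then L else L.insert a a)
          else (if C.contains a = true then L else L.insert a a).insert b b)) := by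
    rw [pv_bAddNode_eq, pv_bAddNode_eq]
  rw [hBdd]
  set C2 := (if (if C.contains a = true then C else C.insert a 0).contains b = true
      then (if C.contains a = true then C else C.insert a 0)
      else (if C.contains a = true then C else C.insert a 0).insert b 0) with hC2
  set L2 := (if (if C.contains a = true then C else C.insert a 0).contains b = true
      then (if C.contains a = true then L else L.insert a a)
      else (if C.contains a = true then L else L.insert a a).insert b b) with hL2
  -- h2 is the invariant for exactly (C2, L2)
  have hInv2 : InvAB (ufAdd (ufAdd R W a 0).1 (ufAdd R W a 0).2 b 0).1
      (ufAdd (ufAdd R W a 0).1 (ufAdd R W a 0).2 b 0).2 C2 L2 := h2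
  have hmem2a : a ∈ (ufAdd (ufAdd R W a 0).1 (ufAdd R W a 0).2 b 0).1.keys :=
    hpres2 a hmem1a
  obtain ⟨hf1, hInv3, hkeys3, hroots3⟩ := pv_find_inv hInv2 a
  obtain ⟨hf2, hInv4, hkeys4, hroots4⟩ := pv_find_inv hInv3 b
  -- shorthands
  set A2R := (ufAdd (ufAdd R W a 0).1 (ufAdd R W a 0).2 b 0).1 with hA2R
  set A2W := (ufAdd (ufAdd R W a 0).1 (ufAdd R W a 0).2 b 0).2 with hA2W
  set F1 := ufFind (A2R.size + 1) A2R A2W a with hF1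
  set F2 := ufFind (F1.2.1.size + 1) F1.2.1 F1.2.2 b with hF2
  -- the two labels are roots of the post-find state and lie in its key list
  have hstab2 : ∀ k, pf A2R ((pf A2R)^[A2R.keys.length] k)
      = (pf A2R)^[A2R.keys.length] k :=
    fun k => pv_stab hInv2.a.hdec hInv2.a.hfin hInv2.a.nodup k
  have hla_root : pf F2.2.1 (L2.getD a a) = L2.getD a a := by
    rw [hroots4, hroots3, hInv2.lab a]
    exact hstab2 a
  have hlb_root : pf F2.2.1 (L2.getD b b) = L2.getD b b := by
    rw [hroots4, hroots3, hInv2.lab b]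
    exact hstab2 b
  have hla_mem : L2.getD a a ∈ F2.2.1.keys := by
    rw [hkeys4, hkeys3, hInv2.lab a]
    rcases pv_reach_mem hInv2.a.hfin ⟨A2R.keys.length, rfl⟩ with hh | hh
    · rw [hh]; exact hmem2a
    · exact hh
  have hlb_mem : L2.getD b b ∈ F2.2.1.keys := by
    rw [hkeys4, hkeys3, hInv2.lab b]
    rcases pv_reach_mem hInv2.a.hfin ⟨A2R.keys.length, rfl⟩ with hh | hh
    · rw [hh]; exact hmem2b
    · exact hh
  rw [← hf1, ← hf2]
  by_cases hcase : F1.1 = F2.1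
  · rw [if_pos hcase, if_pos hcase]
    exact hInv4
  · rw [if_neg hcase, if_neg hcase]
    by_cases hord : F1.1.toList ≤ F2.1.toList
    · rw [if_pos hord, if_pos hord]
      have := pv_inv_merge hInv4 (lo := F1.1) (hi := F2.1)
        (by rw [hf2]; exact hlb_root) (by rw [hf1]; exact hla_root) hcase hord
        (by rw [hf1]; exact hla_mem) (by rw [hf2]; exact hlb_mem)
      rw [hf1, hf2] at this ⊢
      exact this
    · rw [if_neg hord, if_neg hord]
      have hord' : F2.1.toList ≤ F1.1.toList := le_of_not_ge hord
      have := pv_inv_merge hInv4 (lo := F2.1) (hi := F1.1)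
        (by rw [hf1]; exact hla_root) (by rw [hf2]; exact hlb_root)
        (fun hc => hcase hc.symm) hord'
        (by rw [hf2]; exact hlb_mem) (by rw [hf1]; exact hla_mem)
      rw [hf1, hf2] at this ⊢
      exact this


-- items-filter sum of B rewritten as a key-filter sum
theorem pv_items_sum (C : PySem.Dict String Int) (hnd : C.keys.Nodup)
    (L : PySem.Dict String String) (f : String) :
    ((C.items.filter (fun q => L.getD q.1 q.1 = f)).map (fun q => q.2)).sum =
      csum C C.keys (fun j => decide (L.getD j j = f)) := by
  rw [PySem.Dict.items_eq_map_keys C hnd 0, List.filter_map, List.map_map]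
  rfl

-- the output loop: A's find-and-read-weight against B's label lookup and sum
theorem pv_phase3 (C : PySem.Dict String Int) (L : PySem.Dict String String) :
    ∀ (ks : List String) (R : PySem.Dict String String) (W : PySem.Dict String Int)
      (test : PySem.Set String) (res : List String),
    InvAB R W C L → (∀ k ∈ ks, k ∈ R.keys) →
    (ks.foldl (fun (acc : PySem.Set String × List String ×
        PySem.Dict String String × PySem.Dict String Int) data =>
      let r := ufFind (acc.2.2.1.size + 1) acc.2.2.1 acc.2.2.2 data
      if r.1 ∈ acc.1 then (acc.1, acc.2.1, r.2.1, r.2.2)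
      else (acc.1.add r.1,
        acc.2.1 ++ [r.1 ++ "(" ++ PySem.Int.toStr ((r.2.2).getD r.1 0) ++ ")"],
        r.2.1, r.2.2)) (test, res, R, W)).2.1 =
    (ks.foldl (fun (acc : PySem.Set String × List String) j =>
      if L.getD j "" ∈ acc.1 then acc
      else (acc.1.add (L.getD j ""),
        acc.2 ++ [L.getD j "" ++ "(" ++ PySem.Int.toStr
          (((C.items.filter (fun q => L.getD q.1 q.1 = L.getD j "")).map
            (fun q => q.2)).sum) ++ ")"])) (test, res)).2 := by
  intro ks
  induction ks with
  | nil => intro R W test res _ _; rfl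
  | cons k ks ih =>
    intro R W test res h hks
    have hkR : k ∈ R.keys := hks k List.mem_cons_self
    have hkL : k ∈ L.keys := by rw [h.keysL]; exact hkR
    obtain ⟨hv, hInv', hkeys', hroots'⟩ := pv_find_inv h k
    have hvv : (ufFind (R.size + 1) R W k).1 = L.getD k "" := by
      rw [hv]
      exact pv_getD_mem_irrel hkL k ""
    -- the weight A reads at the root equals B's filtered sum
    have hfroot : pf (ufFind (R.size + 1) R W k).2.1 (L.getD k "") = L.getD k "" := by
      rw [← hvv, hv, hroots', h.lab k]
      exact pv_stab h.a.hdec h.a.hfin h.a.nodup k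
    have hfK : L.getD k "" ∈ R.keys := by
      rw [← hvv, hv, h.lab k]
      rcases pv_reach_mem h.a.hfin ⟨R.keys.length, rfl⟩ with hh | hh
      · rw [hh]; exact hkR
      · exact hh
    have hstab' : ∀ j, pf (ufFind (R.size + 1) R W k).2.1 ((pf (ufFind (R.size + 1) R W k).2.1)^[R.keys.length] j)
        = (pf (ufFind (R.size + 1) R W k).2.1)^[R.keys.length] j := by
      intro j
      have := pv_stab hInv'.a.hdec hInv'.a.hfin hInv'.a.nodup j
      rwa [hkeys'] at this
    have hsum : (ufFind (R.size + 1) R W k).2.2.getD (L.getD k "") 0 =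
        ((C.items.filter (fun q => L.getD q.1 q.1 = L.getD k "")).map
          (fun q => q.2)).sum := by
      have hCnd : C.keys.Nodup := by rw [h.keysC]; exact h.a.nodup
      rw [pv_items_sum C hCnd L (L.getD k "")]
      have hw := hInv'.a.hwgt (L.getD k "") (by rw [hkeys']; exact hfK)
      rw [hkeys'] at hw
      rw [hw]
      have hkeysCR : C.keys = R.keys := h.keysC
      rw [hkeysCR]
      apply pv_csum_congr
      intro j _
      apply Bool.eq_iff_iff.mpr
      rw [pv_reachb_iff (hstab' j), decide_eq_true_eq]
      have hlabj : L.getD j j = (pf (ufFind (R.size + 1) R W k).2.1)^[R.keys.length] j := by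
        have := hInv'.lab j
        rwa [hkeys'] at this
      rw [hlabj]
      have hfin'R : ∀ y, pf (ufFind (R.size + 1) R W k).2.1 y = y ∨
          pf (ufFind (R.size + 1) R W k).2.1 y ∈ R.keys := by
        intro y
        have := hInv'.a.hfin y
        rwa [hkeys'] at this
      have hnd'R : R.keys.Nodup := by
        have := hInv'.a.nodup
        rwa [hkeys'] at this
      constructor
      · intro hh
        exact (pv_reach_root_eq hInv'.a.hdec hfin'R hnd'R hh hfroot).symm
      · intro hh
        rw [← hh]
        exact ⟨R.keys.length, rfl⟩
    show (ks.foldl (fun (acc : PySem.Set String × List String ×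
        PySem.Dict String String × PySem.Dict String Int) data =>
      let r := ufFind (acc.2.2.1.size + 1) acc.2.2.1 acc.2.2.2 data
      if r.1 ∈ acc.1 then (acc.1, acc.2.1, r.2.1, r.2.2)
      else (acc.1.add r.1,
        acc.2.1 ++ [r.1 ++ "(" ++ PySem.Int.toStr ((r.2.2).getD r.1 0) ++ ")"],
        r.2.1, r.2.2))
        (if (ufFind (R.size + 1) R W k).1 ∈ test then (test, res, (ufFind (R.size + 1) R W k).2.1, (ufFind (R.size + 1) R W k).2.2)
         else (test.add (ufFind (R.size + 1) R W k).1,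
           res ++ [(ufFind (R.size + 1) R W k).1 ++ "(" ++ PySem.Int.toStr ((ufFind (R.size + 1) R W k).2.2.getD (ufFind (R.size + 1) R W k).1 0) ++ ")"],
           (ufFind (R.size + 1) R W k).2.1, (ufFind (R.size + 1) R W k).2.2))).2.1 =
      (ks.foldl (fun (acc : PySem.Set String × List String) j =>
      if L.getD j "" ∈ acc.1 then acc
      else (acc.1.add (L.getD j ""),
        acc.2 ++ [L.getD j "" ++ "(" ++ PySem.Int.toStr
          (((C.items.filter (fun q => L.getD q.1 q.1 = L.getD j "")).map
            (fun q => q.2)).sum) ++ ")"]))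
        (if L.getD k "" ∈ test then (test, res)
         else (test.add (L.getD k ""),
           res ++ [L.getD k "" ++ "(" ++ PySem.Int.toStr
             (((C.items.filter (fun q => L.getD q.1 q.1 = L.getD k "")).map
               (fun q => q.2)).sum) ++ ")"]))).2
    rw [hvv, hsum]
    have hksnext : ∀ j ∈ ks, j ∈ (ufFind (R.size + 1) R W k).2.1.keys := by
      intro j hj
      rw [hkeys']
      exact hks j (List.mem_cons_of_mem k hj)
    by_cases hmem : L.getD k "" ∈ test
    · rw [if_pos hmem, if_pos hmem]
      exact ih (ufFind (R.size + 1) R W k).2.1 (ufFind (R.size + 1) R W k).2.2 test res hInv' hksnext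
    · rw [if_neg hmem, if_neg hmem]
      exact ih (ufFind (R.size + 1) R W k).2.1 (ufFind (R.size + 1) R W k).2.2 (test.add (L.getD k ""))
        (res ++ [L.getD k "" ++ "(" ++ PySem.Int.toStr
          (((C.items.filter (fun q => L.getD q.1 q.1 = L.getD k "")).map
            (fun q => q.2)).sum) ++ ")"]) hInv' hksnext

-- ===== VERDICT (by name: the statement is the Claim_ definition above) =====
set_option maxHeartbeats 2000000 in
theorem trulyMostPopular_spec : Claim_equal_trulyMostPopular := by
  intro names synonyms _ _
  show trulyMostPopular names synonyms = trulyMostPopular_alt names synonyms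
  have h2 : InvAB (synonyms.foldl (fun (st : PySem.Dict String String × PySem.Dict String Int) (syn : String) =>
      let i := PySem.Str.find syn ","
      ufUnion st.1 st.2 (PySem.Str.slice syn (some 1) (some i))
        (PySem.Str.slice syn (some (i + 1)) (some (-1)))) (names.foldl (fun (st : PySem.Dict String String × PySem.Dict String Int) (name : String) =>
      let left := PySem.Str.find name "("
      ufAdd st.1 st.2 (PySem.Str.slice name none (some left))
        ((PySem.Int.ofStr? (PySem.Str.slice name (some (left + 1)) (some (-1)))).getD 0)) ((PySem.Dict.mk [], PySem.Dict.mk [])))).1 (synonyms.foldl (fun (st : PySem.Dict String String × PySem.Dict String Int) (syn : String) =>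
      let i := PySem.Str.find syn ","
      ufUnion st.1 st.2 (PySem.Str.slice syn (some 1) (some i))
        (PySem.Str.slice syn (some (i + 1)) (some (-1)))) (names.foldl (fun (st : PySem.Dict String String × PySem.Dict String Int) (name : String) =>
      let left := PySem.Str.find name "("
      ufAdd st.1 st.2 (PySem.Str.slice name none (some left))
        ((PySem.Int.ofStr? (PySem.Str.slice name (some (left + 1)) (some (-1)))).getD 0)) ((PySem.Dict.mk [], PySem.Dict.mk [])))).2 (synonyms.foldl (fun (cl : PySem.Dict String Int × PySem.Dict String String) (syn : String) =>
      let i := PySem.Str.find syn ","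
      let a := PySem.Str.slice syn (some 1) (some i)
      let b := PySem.Str.slice syn (some (i + 1)) (some (-1))
      let cl2 := bAddNode (bAddNode cl a) b
      let la := cl2.2.getD a a
      let lb := cl2.2.getD b b
      if la = lb then cl2
      else if la.toList ≤ lb.toList then (cl2.1, relabel cl2.2 lb la)
      else (cl2.1, relabel cl2.2 la lb)) (names.foldl (fun (cl : PySem.Dict String Int × PySem.Dict String String) (name : String) =>
      let left := PySem.Str.find name "("
      let key := PySem.Str.slice name none (some left)
      let cnt := (PySem.Int.ofStr? (PySem.Str.slice name (some (left + 1)) (some (-1)))).getD 0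
      if cl.1.contains key then cl else (cl.1.insert key cnt, cl.2.insert key key)) ((PySem.Dict.mk [], PySem.Dict.mk [])))).1 (synonyms.foldl (fun (cl : PySem.Dict String Int × PySem.Dict String String) (syn : String) =>
      let i := PySem.Str.find syn ","
      let a := PySem.Str.slice syn (some 1) (some i)
      let b := PySem.Str.slice syn (some (i + 1)) (some (-1))
      let cl2 := bAddNode (bAddNode cl a) b
      let la := cl2.2.getD a a
      let lb := cl2.2.getD b b
      if la = lb then cl2
      else if la.toList ≤ lb.toList then (cl2.1, relabel cl2.2 lb la)
      else (cl2.1, relabel cl2.2 la lb)) (names.foldl (fun (cl : PySem.Dict String Int × PySem.Dict String String) (name : String) =>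
      let left := PySem.Str.find name "("
      let key := PySem.Str.slice name none (some left)
      let cnt := (PySem.Int.ofStr? (PySem.Str.slice name (some (left + 1)) (some (-1)))).getD 0
      if cl.1.contains key then cl else (cl.1.insert key cnt, cl.2.insert key key)) ((PySem.Dict.mk [], PySem.Dict.mk [])))).2 := by
    apply pv_foldl_pair (fun (st : PySem.Dict String String × PySem.Dict String Int) (syn : String) =>
      let i := PySem.Str.find syn ","
      ufUnion st.1 st.2 (PySem.Str.slice syn (some 1) (some i))
        (PySem.Str.slice syn (some (i + 1)) (some (-1))))
      (fun (cl : PySem.Dict String Int × PySem.Dict String String) (syn : String) =>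
      let i := PySem.Str.find syn ","
      let a := PySem.Str.slice syn (some 1) (some i)
      let b := PySem.Str.slice syn (some (i + 1)) (some (-1))
      let cl2 := bAddNode (bAddNode cl a) b
      let la := cl2.2.getD a a
      let lb := cl2.2.getD b b
      if la = lb then cl2
      else if la.toList ≤ lb.toList then (cl2.1, relabel cl2.2 lb la)
      else (cl2.1, relabel cl2.2 la lb))
      (fun st cl => InvAB st.1 st.2 cl.1 cl.2) synonyms
    · intro c d x _ hP
      exact pv_inv_union hP (PySem.Str.slice x (some 1) (some (PySem.Str.find x ",")))
        (PySem.Str.slice x (some (PySem.Str.find x "," + 1)) (some (-1)))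
    · apply pv_foldl_pair (fun (st : PySem.Dict String String × PySem.Dict String Int) (name : String) =>
      let left := PySem.Str.find name "("
      ufAdd st.1 st.2 (PySem.Str.slice name none (some left))
        ((PySem.Int.ofStr? (PySem.Str.slice name (some (left + 1)) (some (-1)))).getD 0))
        (fun (cl : PySem.Dict String Int × PySem.Dict String String) (name : String) =>
      let left := PySem.Str.find name "("
      let key := PySem.Str.slice name none (some left)
      let cnt := (PySem.Int.ofStr? (PySem.Str.slice name (some (left + 1)) (some (-1)))).getD 0
      if cl.1.contains key then cl else (cl.1.insert key cnt, cl.2.insert key key))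
        (fun st cl => InvAB st.1 st.2 cl.1 cl.2) names
      · intro c d x _ hP
        obtain ⟨hh, _, _, _⟩ := pv_inv_add hP
          (PySem.Str.slice x none (some (PySem.Str.find x "(")))
          ((PySem.Int.ofStr? (PySem.Str.slice x
            (some (PySem.Str.find x "(" + 1)) (some (-1)))).getD 0)
        show InvAB _ _
          (if d.1.contains (PySem.Str.slice x none (some (PySem.Str.find x "("))) then d
            else (d.1.insert (PySem.Str.slice x none (some (PySem.Str.find x "(")))
                ((PySem.Int.ofStr? (PySem.Str.slice x
                  (some (PySem.Str.find x "(" + 1)) (some (-1)))).getD 0),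
              d.2.insert (PySem.Str.slice x none (some (PySem.Str.find x "(")))
                (PySem.Str.slice x none (some (PySem.Str.find x "("))))).1
          (if d.1.contains (PySem.Str.slice x none (some (PySem.Str.find x "(")))  then d
            else (d.1.insert (PySem.Str.slice x none (some (PySem.Str.find x "(")))
                ((PySem.Int.ofStr? (PySem.Str.slice x
                  (some (PySem.Str.find x "(" + 1)) (some (-1)))).getD 0),
              d.2.insert (PySem.Str.slice x none (some (PySem.Str.find x "(")))
                (PySem.Str.slice x none (some (PySem.Str.find x "("))))).2
        by_cases hct : d.1.contains (PySem.Str.slice x none (some (PySem.Str.find x "("))) = true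
        · rw [if_pos hct] at hh ⊢
          rw [if_pos hct] at hh
          exact hh
        · rw [if_neg hct] at hh ⊢
          rw [if_neg hct] at hh
          exact hh
      · exact pv_inv_empty
  have hnd : (synonyms.foldl (fun (cl : PySem.Dict String Int × PySem.Dict String String) (syn : String) =>
      let i := PySem.Str.find syn ","
      let a := PySem.Str.slice syn (some 1) (some i)
      let b := PySem.Str.slice syn (some (i + 1)) (some (-1))
      let cl2 := bAddNode (bAddNode cl a) b
      let la := cl2.2.getD a a
      let lb := cl2.2.getD b b
      if la = lb then cl2
      else if la.toList ≤ lb.toList then (cl2.1, relabel cl2.2 lb la)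
      else (cl2.1, relabel cl2.2 la lb)) (names.foldl (fun (cl : PySem.Dict String Int × PySem.Dict String String) (name : String) =>
      let left := PySem.Str.find name "("
      let key := PySem.Str.slice name none (some left)
      let cnt := (PySem.Int.ofStr? (PySem.Str.slice name (some (left + 1)) (some (-1)))).getD 0
      if cl.1.contains key then cl else (cl.1.insert key cnt, cl.2.insert key key)) ((PySem.Dict.mk [], PySem.Dict.mk [])))).2.keys.Nodup := by
    rw [h2.keysL]
    exact h2.a.nodup
  have hfinal := pv_phase3 (synonyms.foldl (fun (cl : PySem.Dict String Int × PySem.Dict String String) (syn : String) =>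
      let i := PySem.Str.find syn ","
      let a := PySem.Str.slice syn (some 1) (some i)
      let b := PySem.Str.slice syn (some (i + 1)) (some (-1))
      let cl2 := bAddNode (bAddNode cl a) b
      let la := cl2.2.getD a a
      let lb := cl2.2.getD b b
      if la = lb then cl2
      else if la.toList ≤ lb.toList then (cl2.1, relabel cl2.2 lb la)
      else (cl2.1, relabel cl2.2 la lb)) (names.foldl (fun (cl : PySem.Dict String Int × PySem.Dict String String) (name : String) =>
      let left := PySem.Str.find name "("
      let key := PySem.Str.slice name none (some left)
      let cnt := (PySem.Int.ofStr? (PySem.Str.slice name (some (left + 1)) (some (-1)))).getD 0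
      if cl.1.contains key then cl else (cl.1.insert key cnt, cl.2.insert key key)) ((PySem.Dict.mk [], PySem.Dict.mk [])))).1 (synonyms.foldl (fun (cl : PySem.Dict String Int × PySem.Dict String String) (syn : String) =>
      let i := PySem.Str.find syn ","
      let a := PySem.Str.slice syn (some 1) (some i)
      let b := PySem.Str.slice syn (some (i + 1)) (some (-1))
      let cl2 := bAddNode (bAddNode cl a) b
      let la := cl2.2.getD a a
      let lb := cl2.2.getD b b
      if la = lb then cl2
      else if la.toList ≤ lb.toList then (cl2.1, relabel cl2.2 lb la)
      else (cl2.1, relabel cl2.2 la lb)) (names.foldl (fun (cl : PySem.Dict String Int × PySem.Dict String String) (name : String) =>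
      let left := PySem.Str.find name "("
      let key := PySem.Str.slice name none (some left)
      let cnt := (PySem.Int.ofStr? (PySem.Str.slice name (some (left + 1)) (some (-1)))).getD 0
      if cl.1.contains key then cl else (cl.1.insert key cnt, cl.2.insert key key)) ((PySem.Dict.mk [], PySem.Dict.mk [])))).2 (synonyms.foldl (fun (st : PySem.Dict String String × PySem.Dict String Int) (syn : String) =>
      let i := PySem.Str.find syn ","
      ufUnion st.1 st.2 (PySem.Str.slice syn (some 1) (some i))
        (PySem.Str.slice syn (some (i + 1)) (some (-1)))) (names.foldl (fun (st : PySem.Dict String String × PySem.Dict String Int) (name : String) =>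
      let left := PySem.Str.find name "("
      ufAdd st.1 st.2 (PySem.Str.slice name none (some left))
        ((PySem.Int.ofStr? (PySem.Str.slice name (some (left + 1)) (some (-1)))).getD 0)) ((PySem.Dict.mk [], PySem.Dict.mk [])))).1.keys (synonyms.foldl (fun (st : PySem.Dict String String × PySem.Dict String Int) (syn : String) =>
      let i := PySem.Str.find syn ","
      ufUnion st.1 st.2 (PySem.Str.slice syn (some 1) (some i))
        (PySem.Str.slice syn (some (i + 1)) (some (-1)))) (names.foldl (fun (st : PySem.Dict String String × PySem.Dict String Int) (name : String) =>
      let left := PySem.Str.find name "("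
      ufAdd st.1 st.2 (PySem.Str.slice name none (some left))
        ((PySem.Int.ofStr? (PySem.Str.slice name (some (left + 1)) (some (-1)))).getD 0)) ((PySem.Dict.mk [], PySem.Dict.mk [])))).1 (synonyms.foldl (fun (st : PySem.Dict String String × PySem.Dict String Int) (syn : String) =>
      let i := PySem.Str.find syn ","
      ufUnion st.1 st.2 (PySem.Str.slice syn (some 1) (some i))
        (PySem.Str.slice syn (some (i + 1)) (some (-1)))) (names.foldl (fun (st : PySem.Dict String String × PySem.Dict String Int) (name : String) =>
      let left := PySem.Str.find name "("
      ufAdd st.1 st.2 (PySem.Str.slice name none (some left))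
        ((PySem.Int.ofStr? (PySem.Str.slice name (some (left + 1)) (some (-1)))).getD 0)) ((PySem.Dict.mk [], PySem.Dict.mk [])))).2
    (PySem.Set.ofList []) [] h2 (fun _ hk => hk)
  calc trulyMostPopular names synonyms
      = ((synonyms.foldl (fun (st : PySem.Dict String String × PySem.Dict String Int) (syn : String) =>
      let i := PySem.Str.find syn ","
      ufUnion st.1 st.2 (PySem.Str.slice syn (some 1) (some i))
        (PySem.Str.slice syn (some (i + 1)) (some (-1)))) (names.foldl (fun (st : PySem.Dict String String × PySem.Dict String Int) (name : String) =>
      let left := PySem.Str.find name "("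
      ufAdd st.1 st.2 (PySem.Str.slice name none (some left))
        ((PySem.Int.ofStr? (PySem.Str.slice name (some (left + 1)) (some (-1)))).getD 0)) ((PySem.Dict.mk [], PySem.Dict.mk [])))).1.keys.foldl (fun (acc : PySem.Set String × List String ×
        PySem.Dict String String × PySem.Dict String Int) data =>
      let r := ufFind (acc.2.2.1.size + 1) acc.2.2.1 acc.2.2.2 data
      if r.1 ∈ acc.1 then (acc.1, acc.2.1, r.2.1, r.2.2)
      else (acc.1.add r.1,
        acc.2.1 ++ [r.1 ++ "(" ++ PySem.Int.toStr ((r.2.2).getD r.1 0) ++ ")"],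
        r.2.1, r.2.2))
          (PySem.Set.ofList [], [], (synonyms.foldl (fun (st : PySem.Dict String String × PySem.Dict String Int) (syn : String) =>
      let i := PySem.Str.find syn ","
      ufUnion st.1 st.2 (PySem.Str.slice syn (some 1) (some i))
        (PySem.Str.slice syn (some (i + 1)) (some (-1)))) (names.foldl (fun (st : PySem.Dict String String × PySem.Dict String Int) (name : String) =>
      let left := PySem.Str.find name "("
      ufAdd st.1 st.2 (PySem.Str.slice name none (some left))
        ((PySem.Int.ofStr? (PySem.Str.slice name (some (left + 1)) (some (-1)))).getD 0)) ((PySem.Dict.mk [], PySem.Dict.mk [])))).1, (synonyms.foldl (fun (st : PySem.Dict String String × PySem.Dict String Int) (syn : String) =>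
      let i := PySem.Str.find syn ","
      ufUnion st.1 st.2 (PySem.Str.slice syn (some 1) (some i))
        (PySem.Str.slice syn (some (i + 1)) (some (-1)))) (names.foldl (fun (st : PySem.Dict String String × PySem.Dict String Int) (name : String) =>
      let left := PySem.Str.find name "("
      ufAdd st.1 st.2 (PySem.Str.slice name none (some left))
        ((PySem.Int.ofStr? (PySem.Str.slice name (some (left + 1)) (some (-1)))).getD 0)) ((PySem.Dict.mk [], PySem.Dict.mk [])))).2)).2.1 := rfl
    _ = ((synonyms.foldl (fun (st : PySem.Dict String String × PySem.Dict String Int) (syn : String) =>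
      let i := PySem.Str.find syn ","
      ufUnion st.1 st.2 (PySem.Str.slice syn (some 1) (some i))
        (PySem.Str.slice syn (some (i + 1)) (some (-1)))) (names.foldl (fun (st : PySem.Dict String String × PySem.Dict String Int) (name : String) =>
      let left := PySem.Str.find name "("
      ufAdd st.1 st.2 (PySem.Str.slice name none (some left))
        ((PySem.Int.ofStr? (PySem.Str.slice name (some (left + 1)) (some (-1)))).getD 0)) ((PySem.Dict.mk [], PySem.Dict.mk [])))).1.keys.foldl (fun (acc : PySem.Set String × List String) j =>
      if (synonyms.foldl (fun (cl : PySem.Dict String Int × PySem.Dict String String) (syn : String) =>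
      let i := PySem.Str.find syn ","
      let a := PySem.Str.slice syn (some 1) (some i)
      let b := PySem.Str.slice syn (some (i + 1)) (some (-1))
      let cl2 := bAddNode (bAddNode cl a) b
      let la := cl2.2.getD a a
      let lb := cl2.2.getD b b
      if la = lb then cl2
      else if la.toList ≤ lb.toList then (cl2.1, relabel cl2.2 lb la)
      else (cl2.1, relabel cl2.2 la lb)) (names.foldl (fun (cl : PySem.Dict String Int × PySem.Dict String String) (name : String) =>
      let left := PySem.Str.find name "("
      let key := PySem.Str.slice name none (some left)
      let cnt := (PySem.Int.ofStr? (PySem.Str.slice name (some (left + 1)) (some (-1)))).getD 0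
      if cl.1.contains key then cl else (cl.1.insert key cnt, cl.2.insert key key)) ((PySem.Dict.mk [], PySem.Dict.mk [])))).2.getD j "" ∈ acc.1 then acc
      else (acc.1.add ((synonyms.foldl (fun (cl : PySem.Dict String Int × PySem.Dict String String) (syn : String) =>
      let i := PySem.Str.find syn ","
      let a := PySem.Str.slice syn (some 1) (some i)
      let b := PySem.Str.slice syn (some (i + 1)) (some (-1))
      let cl2 := bAddNode (bAddNode cl a) b
      let la := cl2.2.getD a a
      let lb := cl2.2.getD b b
      if la = lb then cl2
      else if la.toList ≤ lb.toList then (cl2.1, relabel cl2.2 lb la)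
      else (cl2.1, relabel cl2.2 la lb)) (names.foldl (fun (cl : PySem.Dict String Int × PySem.Dict String String) (name : String) =>
      let left := PySem.Str.find name "("
      let key := PySem.Str.slice name none (some left)
      let cnt := (PySem.Int.ofStr? (PySem.Str.slice name (some (left + 1)) (some (-1)))).getD 0
      if cl.1.contains key then cl else (cl.1.insert key cnt, cl.2.insert key key)) ((PySem.Dict.mk [], PySem.Dict.mk [])))).2.getD j ""),
        acc.2 ++ [(synonyms.foldl (fun (cl : PySem.Dict String Int × PySem.Dict String String) (syn : String) =>
      let i := PySem.Str.find syn ","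
      let a := PySem.Str.slice syn (some 1) (some i)
      let b := PySem.Str.slice syn (some (i + 1)) (some (-1))
      let cl2 := bAddNode (bAddNode cl a) b
      let la := cl2.2.getD a a
      let lb := cl2.2.getD b b
      if la = lb then cl2
      else if la.toList ≤ lb.toList then (cl2.1, relabel cl2.2 lb la)
      else (cl2.1, relabel cl2.2 la lb)) (names.foldl (fun (cl : PySem.Dict String Int × PySem.Dict String String) (name : String) =>
      let left := PySem.Str.find name "("
      let key := PySem.Str.slice name none (some left)
      let cnt := (PySem.Int.ofStr? (PySem.Str.slice name (some (left + 1)) (some (-1)))).getD 0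
      if cl.1.contains key then cl else (cl.1.insert key cnt, cl.2.insert key key)) ((PySem.Dict.mk [], PySem.Dict.mk [])))).2.getD j "" ++ "(" ++ PySem.Int.toStr
          ((((synonyms.foldl (fun (cl : PySem.Dict String Int × PySem.Dict String String) (syn : String) =>
      let i := PySem.Str.find syn ","
      let a := PySem.Str.slice syn (some 1) (some i)
      let b := PySem.Str.slice syn (some (i + 1)) (some (-1))
      let cl2 := bAddNode (bAddNode cl a) b
      let la := cl2.2.getD a a
      let lb := cl2.2.getD b b
      if la = lb then cl2
      else if la.toList ≤ lb.toList then (cl2.1, relabel cl2.2 lb la)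
      else (cl2.1, relabel cl2.2 la lb)) (names.foldl (fun (cl : PySem.Dict String Int × PySem.Dict String String) (name : String) =>
      let left := PySem.Str.find name "("
      let key := PySem.Str.slice name none (some left)
      let cnt := (PySem.Int.ofStr? (PySem.Str.slice name (some (left + 1)) (some (-1)))).getD 0
      if cl.1.contains key then cl else (cl.1.insert key cnt, cl.2.insert key key)) ((PySem.Dict.mk [], PySem.Dict.mk [])))).1.items.filter (fun q => (synonyms.foldl (fun (cl : PySem.Dict String Int × PySem.Dict String String) (syn : String) =>
      let i := PySem.Str.find syn ","
      let a := PySem.Str.slice syn (some 1) (some i)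
      let b := PySem.Str.slice syn (some (i + 1)) (some (-1))
      let cl2 := bAddNode (bAddNode cl a) b
      let la := cl2.2.getD a a
      let lb := cl2.2.getD b b
      if la = lb then cl2
      else if la.toList ≤ lb.toList then (cl2.1, relabel cl2.2 lb la)
      else (cl2.1, relabel cl2.2 la lb)) (names.foldl (fun (cl : PySem.Dict String Int × PySem.Dict String String) (name : String) =>
      let left := PySem.Str.find name "("
      let key := PySem.Str.slice name none (some left)
      let cnt := (PySem.Int.ofStr? (PySem.Str.slice name (some (left + 1)) (some (-1)))).getD 0
      if cl.1.contains key then cl else (cl.1.insert key cnt, cl.2.insert key key)) ((PySem.Dict.mk [], PySem.Dict.mk [])))).2.getD q.1 q.1 = (synonyms.foldl (fun (cl : PySem.Dict String Int × PySem.Dict String String) (syn : String) =>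
      let i := PySem.Str.find syn ","
      let a := PySem.Str.slice syn (some 1) (some i)
      let b := PySem.Str.slice syn (some (i + 1)) (some (-1))
      let cl2 := bAddNode (bAddNode cl a) b
      let la := cl2.2.getD a a
      let lb := cl2.2.getD b b
      if la = lb then cl2
      else if la.toList ≤ lb.toList then (cl2.1, relabel cl2.2 lb la)
      else (cl2.1, relabel cl2.2 la lb)) (names.foldl (fun (cl : PySem.Dict String Int × PySem.Dict String String) (name : String) =>
      let left := PySem.Str.find name "("
      let key := PySem.Str.slice name none (some left)
      let cnt := (PySem.Int.ofStr? (PySem.Str.slice name (some (left + 1)) (some (-1)))).getD 0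
      if cl.1.contains key then cl else (cl.1.insert key cnt, cl.2.insert key key)) ((PySem.Dict.mk [], PySem.Dict.mk [])))).2.getD j "")).map
            (fun q => q.2)).sum) ++ ")"])) (PySem.Set.ofList [], [])).2 := hfinal
    _ = trulyMostPopular_alt names synonyms := by
        show _ = ((synonyms.foldl (fun (cl : PySem.Dict String Int × PySem.Dict String String) (syn : String) =>
      let i := PySem.Str.find syn ","
      let a := PySem.Str.slice syn (some 1) (some i)
      let b := PySem.Str.slice syn (some (i + 1)) (some (-1))
      let cl2 := bAddNode (bAddNode cl a) b
      let la := cl2.2.getD a a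
      let lb := cl2.2.getD b b
      if la = lb then cl2
      else if la.toList ≤ lb.toList then (cl2.1, relabel cl2.2 lb la)
      else (cl2.1, relabel cl2.2 la lb)) (names.foldl (fun (cl : PySem.Dict String Int × PySem.Dict String String) (name : String) =>
      let left := PySem.Str.find name "("
      let key := PySem.Str.slice name none (some left)
      let cnt := (PySem.Int.ofStr? (PySem.Str.slice name (some (left + 1)) (some (-1)))).getD 0
      if cl.1.contains key then cl else (cl.1.insert key cnt, cl.2.insert key key)) ((PySem.Dict.mk [], PySem.Dict.mk [])))).2.items.foldl (fun (acc : PySem.Set String × List String) p =>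
      if p.2 ∈ acc.1 then acc
      else (acc.1.add p.2,
        acc.2 ++ [p.2 ++ "(" ++ PySem.Int.toStr
          ((((synonyms.foldl (fun (cl : PySem.Dict String Int × PySem.Dict String String) (syn : String) =>
      let i := PySem.Str.find syn ","
      let a := PySem.Str.slice syn (some 1) (some i)
      let b := PySem.Str.slice syn (some (i + 1)) (some (-1))
      let cl2 := bAddNode (bAddNode cl a) b
      let la := cl2.2.getD a a
      let lb := cl2.2.getD b b
      if la = lb then cl2
      else if la.toList ≤ lb.toList then (cl2.1, relabel cl2.2 lb la)
      else (cl2.1, relabel cl2.2 la lb)) (names.foldl (fun (cl : PySem.Dict String Int × PySem.Dict String String) (name : String) =>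
      let left := PySem.Str.find name "("
      let key := PySem.Str.slice name none (some left)
      let cnt := (PySem.Int.ofStr? (PySem.Str.slice name (some (left + 1)) (some (-1)))).getD 0
      if cl.1.contains key then cl else (cl.1.insert key cnt, cl.2.insert key key)) ((PySem.Dict.mk [], PySem.Dict.mk [])))).1.items.filter (fun q => (synonyms.foldl (fun (cl : PySem.Dict String Int × PySem.Dict String String) (syn : String) =>
      let i := PySem.Str.find syn ","
      let a := PySem.Str.slice syn (some 1) (some i)
      let b := PySem.Str.slice syn (some (i + 1)) (some (-1))
      let cl2 := bAddNode (bAddNode cl a) b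
      let la := cl2.2.getD a a
      let lb := cl2.2.getD b b
      if la = lb then cl2
      else if la.toList ≤ lb.toList then (cl2.1, relabel cl2.2 lb la)
      else (cl2.1, relabel cl2.2 la lb)) (names.foldl (fun (cl : PySem.Dict String Int × PySem.Dict String String) (name : String) =>
      let left := PySem.Str.find name "("
      let key := PySem.Str.slice name none (some left)
      let cnt := (PySem.Int.ofStr? (PySem.Str.slice name (some (left + 1)) (some (-1)))).getD 0
      if cl.1.contains key then cl else (cl.1.insert key cnt, cl.2.insert key key)) ((PySem.Dict.mk [], PySem.Dict.mk [])))).2.getD q.1 q.1 = p.2)).map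
            (fun q => q.2)).sum) ++ ")"])) (PySem.Set.ofList [], [])).2
        rw [PySem.Dict.items_eq_map_keys (synonyms.foldl (fun (cl : PySem.Dict String Int × PySem.Dict String String) (syn : String) =>
      let i := PySem.Str.find syn ","
      let a := PySem.Str.slice syn (some 1) (some i)
      let b := PySem.Str.slice syn (some (i + 1)) (some (-1))
      let cl2 := bAddNode (bAddNode cl a) b
      let la := cl2.2.getD a a
      let lb := cl2.2.getD b b
      if la = lb then cl2
      else if la.toList ≤ lb.toList then (cl2.1, relabel cl2.2 lb la)
      else (cl2.1, relabel cl2.2 la lb)) (names.foldl (fun (cl : PySem.Dict String Int × PySem.Dict String String) (name : String) =>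
      let left := PySem.Str.find name "("
      let key := PySem.Str.slice name none (some left)
      let cnt := (PySem.Int.ofStr? (PySem.Str.slice name (some (left + 1)) (some (-1)))).getD 0
      if cl.1.contains key then cl else (cl.1.insert key cnt, cl.2.insert key key)) ((PySem.Dict.mk [], PySem.Dict.mk [])))).2 hnd "", List.foldl_map, h2.keysL]
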